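-- pv_equiv track=rewrite | github.com/YunTianZhou/LeetcodeContest | Weekly Contest/Weekly Contest 493/3873. Maximum Points Activated with One Addition.py | maxActivated
-- ===== SOURCE A (Python) =====
-- def maxActivated(points: list[list[int]]) -> int:
--     n = len(points)
--
--     uf = list(range(n))
--     size = [1] * n
--
--     def find(x):
--         while x != uf[x]:
--             uf[x] = uf[uf[x]]
--             x = uf[x]
--         return x
--
--     def union(x, y):
--         a = find(x)
--         b = find(y)
--         uf[b] = a
--         size[a] += size[b]
--         size[b] = 0
--
--     rx = {}
--     ry = {}
--     for i, (x, y) in enumerate(points):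
--         if x in rx:
--             union(i, rx[x])
--         if y in ry:
--             union(i, ry[y])
--         rx[x] = i
--         ry[y] = i
--
--     top1 = top2 = 0
--     for i in range(n):
--         x = size[i]
--         if x > top1:
--             top2 = top1
--             top1 = x
--         elif x > top2:
--             top2 = x
--
--     return top1 + top2 + 1
-- ===== SOURCE B (Python) =====
-- def maxActivated(points: list[list[int]]) -> int:
--     # Maintain disjoint components as (x-coordinate set, y-coordinate set, size);
--     # each new point absorbs every component sharing one of its coordinates.
--     comps = []
--     for x, y in points:
--         xs, ys, sz = {x}, {y}, 1
--         rest = []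
--         for cxs, cys, csz in comps:
--             if x in cxs or y in cys:
--                 xs |= cxs
--                 ys |= cys
--                 sz += csz
--             else:
--                 rest.append((cxs, cys, csz))
--         rest.append((xs, ys, sz))
--         comps = rest
--     sizes = sorted((sz for _, _, sz in comps), reverse=True)
--     return sum(sizes[:2]) + 1
-- ===== Notes on version B (the rewrite author's own statement) =====
-- stated objective: alternative
-- what changed: Replaces the index-based union-find (path halving, last-occurrence coordinate dicts, manual top-two scan over the size array) by a fold that keeps each connected component as a (x-coordinate set, y-coordinate set, size) triple, merging every component the new point touches, then sorts the component sizes and sums the two largest.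
-- intended difference: Exactly when the shared-coordinate multigraph of the points has a cycle (closed form: distinct x-count + distinct y-count < number of points + number of components), A's unguarded union doubles then zeroes a component's size so the component is lost from the top-two (e.g. [[0,0],[0,0]] gives 1); B returns the intended sum of the two largest true component sizes plus one (3 there). — e.g. on maxActivated([[0, 0], [0, 0]]): A returns 1, B returns 3
import Mathlib
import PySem

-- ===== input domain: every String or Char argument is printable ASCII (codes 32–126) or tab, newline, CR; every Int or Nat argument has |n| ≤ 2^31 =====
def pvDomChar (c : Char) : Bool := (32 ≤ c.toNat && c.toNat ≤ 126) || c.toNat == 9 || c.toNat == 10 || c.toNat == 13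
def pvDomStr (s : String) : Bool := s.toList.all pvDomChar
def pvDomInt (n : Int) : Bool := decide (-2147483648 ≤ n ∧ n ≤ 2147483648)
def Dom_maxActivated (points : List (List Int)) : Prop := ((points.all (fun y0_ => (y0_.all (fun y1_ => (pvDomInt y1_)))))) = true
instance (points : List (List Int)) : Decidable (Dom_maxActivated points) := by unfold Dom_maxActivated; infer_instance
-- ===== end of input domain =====

-- B replaces A's union-find over indices by a fold that merges components kept as
-- (x-coordinate set, y-coordinate set, size) triples; same cost class, no speed claim.

-- ===== PORT A =====

-- the body of `while x != uf[x]: uf[x] = uf[uf[x]]; x = uf[x]`; fuel is only a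
-- totality guard (on the states A builds the loop always ends within uf.length steps)
def pvFindLoop : Nat → List Int → Int → List Int × Int
  | 0, uf, x => (uf, x)
  | fuel+1, uf, x =>
    if x ≠ PySem.List.pyGetD uf x 0 then
      let uf' := PySem.List.pySetD uf x (PySem.List.pyGetD uf (PySem.List.pyGetD uf x 0) 0)
      pvFindLoop fuel uf' (PySem.List.pyGetD uf' x 0)
    else (uf, x)

def pvFind (uf : List Int) (x : Int) : List Int × Int := pvFindLoop uf.length uf x

def pvUnionA (uf size : List Int) (x y : Int) : List Int × List Int :=
  let fa := pvFind uf x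
  let fb := pvFind fa.1 y
  let a := fa.2
  let b := fb.2
  let uf2 := PySem.List.pySetD fb.1 b a
  let size1 := PySem.List.pySetD size a (PySem.List.pyGetD size a 0 + PySem.List.pyGetD size b 0)
  let size2 := PySem.List.pySetD size1 b 0
  (uf2, size2)

def pvStepA (st : List Int × List Int × PySem.Dict Int Int × PySem.Dict Int Int)
    (ip : Int × List Int) : List Int × List Int × PySem.Dict Int Int × PySem.Dict Int Int :=
  -- Python raises ValueError unless the point has exactly 2 entries (excluded by Pre_)
  let xy : Int × Int := match ip.2 with | [x, y] => (x, y) | _ => (0, 0)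
  let s1 : List Int × List Int :=
    match st.2.2.1.get? xy.1 with
    | some j => pvUnionA st.1 st.2.1 ip.1 j
    | none => (st.1, st.2.1)
  let s2 : List Int × List Int :=
    match st.2.2.2.get? xy.2 with
    | some j => pvUnionA s1.1 s1.2 ip.1 j
    | none => s1
  (s2.1, s2.2, st.2.2.1.insert xy.1 ip.1, st.2.2.2.insert xy.2 ip.1)

def maxActivated (points : List (List Int)) : Int :=
  let n : Int := points.length
  let uf := PySem.List.pyRange 0 n 1
  let size := List.replicate points.length (1 : Int)
  let st := (PySem.List.enumerate points 0).foldl pvStepA (uf, size, PySem.Dict.empty, PySem.Dict.empty)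
  let t := (PySem.List.pyRange 0 n 1).foldl
    (fun (t : Int × Int) i =>
      let x := PySem.List.pyGetD st.2.1 i 0
      if x > t.1 then (x, t.1) else if x > t.2 then (t.1, x) else t) (0, 0)
  t.1 + t.2 + 1

-- ===== PORT B =====

def pvStepB (comps : List (PySem.Set Int × PySem.Set Int × Int)) (p : List Int) :
    List (PySem.Set Int × PySem.Set Int × Int) :=
  let xy : Int × Int := match p with | [x, y] => (x, y) | _ => (0, 0)
  let acc := comps.foldl
    (fun (st : PySem.Set Int × PySem.Set Int × Int × List (PySem.Set Int × PySem.Set Int × Int)) c =>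
      if PySem.Set.contains c.1 xy.1 || PySem.Set.contains c.2.1 xy.2 then
        (PySem.Set.union st.1 c.1, PySem.Set.union st.2.1 c.2.1, st.2.2.1 + c.2.2, st.2.2.2)
      else (st.1, st.2.1, st.2.2.1, st.2.2.2 ++ [c]))
    (PySem.Set.ofList [xy.1], PySem.Set.ofList [xy.2], (1 : Int), [])
  acc.2.2.2 ++ [(acc.1, acc.2.1, acc.2.2.1)]

def maxActivated_alt (points : List (List Int)) : Int :=
  let comps := points.foldl pvStepB []
  let sizes := PySem.List.sorted (comps.map (fun c => c.2.2)) (fun v => v) true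
  (PySem.List.slice sizes none (some 2)).sum + 1

-- ===== PRECONDITION & SPEC =====

-- Pre_ excludes points that are not [x, y] pairs: Python's `for i, (x, y) in enumerate(points)`
-- raises ValueError on them, so A returns nothing there.
def Pre_maxActivated (points : List (List Int)) : Prop :=
  (points.all (fun p => p.length == 2)) = true
instance (points : List (List Int)) : Decidable (Pre_maxActivated points) := by
  unfold Pre_maxActivated; infer_instance

def pvWitness_maxActivated : List (List Int) := [[0, 1], [2, 3]]

-- Exactly when the shared-coordinate multigraph of the points has a cycle (closed form:
-- distinct x-count + distinct y-count < number of points + number of components), A's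
-- unguarded union doubles then zeroes a component's size so the component is lost from the
-- top-two (e.g. [[0,0],[0,0]] gives 1); B returns the intended sum of the two largest true
-- component sizes plus one (3 there).
def D_maxActivated (points : List (List Int)) : Prop :=
  let ps := points.map fun p => (p.getD 0 0, p.getD 1 0)
  let gs := ps.foldl (fun gs p =>
    (gs.filter fun g => !g.any fun q => q.1 == p.1 || q.2 == p.2) ++
      [p :: (gs.filter fun g => g.any fun q => q.1 == p.1 || q.2 == p.2).flatten]) []
  (ps.map Prod.fst).toFinset.card + (ps.map Prod.snd).toFinset.card < ps.length + gs.length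
instance (points : List (List Int)) : Decidable (D_maxActivated points) := by
  unfold D_maxActivated; infer_instance

def Spec_maxActivated (points : List (List Int)) (out : Int) : Prop :=
  ¬ D_maxActivated points → out = maxActivated_alt points
instance (points : List (List Int)) (out : Int) : Decidable (Spec_maxActivated points out) := by
  unfold Spec_maxActivated; infer_instance

def pvDiffWitness_maxActivated : List (List Int) := [[0, 0], [0, 0]]
def pvDiffWitnessOut_maxActivated : Int × Int := (1, 3)

-- ===== CLAIM (what is proved, stated in full; the proofs are below) =====
def Claim_unchanged_maxActivated : Prop := ∀ (points : List (List Int)),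
  Dom_maxActivated points → Pre_maxActivated points →
  Spec_maxActivated points (maxActivated points)
def Claim_changed_maxActivated : Prop :=
  Dom_maxActivated (pvDiffWitness_maxActivated) ∧
  Pre_maxActivated (pvDiffWitness_maxActivated) ∧
  D_maxActivated (pvDiffWitness_maxActivated) ∧
  maxActivated (pvDiffWitness_maxActivated) = pvDiffWitnessOut_maxActivated.1 ∧
  maxActivated_alt (pvDiffWitness_maxActivated) = pvDiffWitnessOut_maxActivated.2 ∧
  pvDiffWitnessOut_maxActivated.1 ≠ pvDiffWitnessOut_maxActivated.2

-- ===== LEMMAS AND PROOFS =====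

def pvPair (p : List Int) : Int × Int := match p with | [x, y] => (x, y) | _ => (0, 0)

-- the incremental component partition (the fold inside D_ is definitionally this one)
def pvTouch (p : Int × Int) (g : List (Int × Int)) : Bool :=
  g.any (fun q => q.1 == p.1 || q.2 == p.2)
def pvGStep (gs : List (List (Int × Int))) (p : Int × Int) : List (List (Int × Int)) :=
  (gs.filter (fun g => !pvTouch p g)) ++ [p :: (gs.filter (pvTouch p)).flatten]
def pvGroups (ps : List (Int × Int)) : List (List (Int × Int)) := ps.foldl pvGStep []
def pvBadStep (gs : List (List (Int × Int))) (p : Int × Int) : Bool :=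
  gs.any (fun g => g.any (fun q => q.1 == p.1) && g.any (fun q => q.2 == p.2))
def pvBad (ps : List (Int × Int)) : Bool :=
  (ps.foldl (fun st p => (pvGStep st.1 p, st.2 || pvBadStep st.1 p))
    (([] : List (List (Int × Int))), false)).2
def pvCnt (ps : List (Int × Int)) : Nat :=
  (ps.foldl (fun st p => (pvGStep st.1 p, st.2 + (if pvBadStep st.1 p then 1 else 0)))
    (([] : List (List (Int × Int))), 0)).2

-- ---------- union-find array machinery ----------

def pvParN (uf : List Int) (j : Nat) : Nat := (PySem.List.pyGetD uf (j : Int) 0).toNat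

def pvMono (uf : List Int) : Prop :=
  ∀ j : Nat, j < uf.length →
    (j : Int) ≤ PySem.List.pyGetD uf (j : Int) 0 ∧ PySem.List.pyGetD uf (j : Int) 0 < (uf.length : Int)

def pvRoot (uf : List Int) (j : Nat) : Nat :=
  if h : j < pvParN uf j ∧ pvParN uf j < uf.length then pvRoot uf (pvParN uf j) else j
termination_by uf.length - j
decreasing_by omega

lemma pvParN_cast {uf : List Int} (hm : pvMono uf) {j : Nat} (hj : j < uf.length) :
    (pvParN uf j : Int) = PySem.List.pyGetD uf (j : Int) 0 ∧ j ≤ pvParN uf j ∧ pvParN uf j < uf.length := by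
  have h := hm j hj
  have h0 : (0:Int) ≤ PySem.List.pyGetD uf (j : Int) 0 := le_trans (by exact_mod_cast Nat.zero_le j) h.1
  unfold pvParN
  constructor
  · exact Int.toNat_of_nonneg h0
  · omega

lemma pvRoot_eq (uf : List Int) (j : Nat) :
    pvRoot uf j = if j < pvParN uf j ∧ pvParN uf j < uf.length then pvRoot uf (pvParN uf j) else j := by
  rw [pvRoot]; split_ifs with h <;> simp [h]

lemma pvRoot_fix {uf : List Int} {j : Nat} (h : pvParN uf j = j) : pvRoot uf j = j := by
  rw [pvRoot_eq]; simp [h]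

lemma pvRoot_spec {uf : List Int} (hm : pvMono uf) :
    ∀ j : Nat, j < uf.length →
      j ≤ pvRoot uf j ∧ pvRoot uf j < uf.length ∧ pvParN uf (pvRoot uf j) = pvRoot uf j := by
  intro j hj
  induction hn : uf.length - j using Nat.strong_induction_on generalizing j with
  | _ m ih =>
    obtain ⟨-, hle, hlt⟩ := pvParN_cast hm hj
    by_cases hfix : pvParN uf j = j
    · rw [pvRoot_fix hfix]
      exact ⟨le_refl j, hj, hfix⟩
    · have hjp : j < pvParN uf j := lt_of_le_of_ne hle (Ne.symm hfix)
      have h2 := ih (uf.length - pvParN uf j) (by omega) (pvParN uf j) hlt rfl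
      rw [pvRoot_eq]
      simp only [hjp, hlt, and_self, if_true]
      omega

lemma pvRoot_par {uf : List Int} (hm : pvMono uf) {j : Nat} (hj : j < uf.length) :
    pvRoot uf (pvParN uf j) = pvRoot uf j := by
  obtain ⟨-, hle, hlt⟩ := pvParN_cast hm hj
  by_cases hfix : pvParN uf j = j
  · rw [hfix]
  · rw [pvRoot_eq uf j]
    simp [lt_of_le_of_ne hle (Ne.symm hfix), hlt]

lemma pvParN_le_root {uf : List Int} (hm : pvMono uf) {j : Nat} (hj : j < uf.length) :
    pvParN uf j ≤ pvRoot uf j := by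
  obtain ⟨-, hle, hlt⟩ := pvParN_cast hm hj
  calc pvParN uf j ≤ pvRoot uf (pvParN uf j) := (pvRoot_spec hm _ hlt).1
  _ = pvRoot uf j := pvRoot_par hm hj


lemma pvSet_entry (uf : List Int) (x : Nat) (hx : x < uf.length) (v : Int) (m : Nat) :
    PySem.List.pyGetD (PySem.List.pySetD uf (x : Int) v) (m : Int) 0 =
      if m = x then v else PySem.List.pyGetD uf (m : Int) 0 :=
  PySem.List.pyGetD_pySetD_natCast uf x m v 0 hx

lemma pvSet_len (uf : List Int) (x : Nat) (v : Int) :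
    (PySem.List.pySetD uf (x : Int) v).length = uf.length := by
  rw [PySem.List.pySetD_natCast]; simp

lemma pvHalve (uf : List Int) (x w : Nat) (hm : pvMono uf) (hx : x < uf.length) (hxw : x < w)
    (hw : w < uf.length) (hroot : pvRoot uf w = pvRoot uf x) (hnf : pvParN uf x ≠ x) :
    (PySem.List.pySetD uf (x : Int) (w : Int)).length = uf.length ∧
    pvMono (PySem.List.pySetD uf (x : Int) (w : Int)) ∧
    (∀ m, m < uf.length → pvRoot (PySem.List.pySetD uf (x : Int) (w : Int)) m = pvRoot uf m) ∧
    (∀ m, pvParN (PySem.List.pySetD uf (x : Int) (w : Int)) m = m ↔ pvParN uf m = m) := by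
  set uf' := PySem.List.pySetD uf (x : Int) (w : Int) with huf'
  have hlen : uf'.length = uf.length := pvSet_len uf x _
  have hent : ∀ m : Nat, PySem.List.pyGetD uf' (m : Int) 0 =
      if m = x then (w : Int) else PySem.List.pyGetD uf (m : Int) 0 := fun m => pvSet_entry uf x hx _ m
  have hpar : ∀ m : Nat, pvParN uf' m = if m = x then w else pvParN uf m := by
    intro m; unfold pvParN; rw [hent m]; by_cases h : m = x <;> simp [h]
  have hmono : pvMono uf' := by
    intro j hj
    rw [hlen] at hj ⊢
    rw [hent j]
    by_cases h : j = x
    · subst h; rw [if_pos rfl]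
      constructor
      · exact_mod_cast Nat.le_of_lt hxw
      · exact_mod_cast hw
    · simp only [h, if_false]; exact hm j hj
  refine ⟨hlen, hmono, ?_, ?_⟩
  · intro m hmlt
    induction hn : uf.length - m using Nat.strong_induction_on generalizing m with
    | _ n ih =>
      by_cases hmx : m = x
      · subst hmx
        have hw2 : pvRoot uf' w = pvRoot uf w := by
          by_cases hfw : pvParN uf w = w
          · have : pvParN uf' w = w := by rw [hpar w]; simp [Nat.ne_of_gt hxw, hfw]
            rw [pvRoot_fix this, pvRoot_fix hfw]
          · exact ih (uf.length - w) (by omega) w hw rfl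
        have h1 : pvRoot uf' m = pvRoot uf' w := by
          have hp : pvParN uf' m = w := by rw [hpar m]; simp
          rw [pvRoot_eq, hp, if_pos ⟨hxw, by rw [hlen]; exact hw⟩]
        rw [h1, hw2, hroot]
      · have hpm : pvParN uf' m = pvParN uf m := by rw [hpar m]; simp [hmx]
        by_cases hfm : pvParN uf m = m
        · have : pvParN uf' m = m := by rw [hpm, hfm]
          rw [pvRoot_fix this, pvRoot_fix hfm]
        · obtain ⟨-, hle, hlt⟩ := pvParN_cast hm hmlt
          have hmp : m < pvParN uf m := lt_of_le_of_ne hle (Ne.symm hfm)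
          have h1 : pvRoot uf' m = pvRoot uf' (pvParN uf m) := by
            rw [pvRoot_eq, hpm, if_pos ⟨hmp, by rw [hlen]; exact hlt⟩]
          have h2 := ih (uf.length - pvParN uf m) (by omega) (pvParN uf m) hlt rfl
          rw [h1, h2, pvRoot_par hm hmlt]
  · intro m
    by_cases h : m = x
    · subst h
      have hp : pvParN uf' m = w := by rw [hpar m]; simp
      rw [hp]
      constructor
      · intro hwm; omega
      · intro hc; exact absurd hc hnf
    · rw [hpar m]; simp [h]

lemma pvLink (uf : List Int) (b a : Nat) (hm : pvMono uf) (hb : b < uf.length) (ha : a < uf.length)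
    (hba : b < a) (hfb : pvParN uf b = b) (hfa : pvParN uf a = a) :
    (PySem.List.pySetD uf (b : Int) (a : Int)).length = uf.length ∧
    pvMono (PySem.List.pySetD uf (b : Int) (a : Int)) ∧
    (∀ m, m < uf.length → pvRoot (PySem.List.pySetD uf (b : Int) (a : Int)) m =
        if pvRoot uf m = b then a else pvRoot uf m) ∧
    (∀ m, pvParN (PySem.List.pySetD uf (b : Int) (a : Int)) m = m ↔ (pvParN uf m = m ∧ m ≠ b)) := by
  set uf' := PySem.List.pySetD uf (b : Int) (a : Int) with huf'
  have hlen : uf'.length = uf.length := pvSet_len uf b _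
  have hent : ∀ m : Nat, PySem.List.pyGetD uf' (m : Int) 0 =
      if m = b then (a : Int) else PySem.List.pyGetD uf (m : Int) 0 := fun m => pvSet_entry uf b hb _ m
  have hpar : ∀ m : Nat, pvParN uf' m = if m = b then a else pvParN uf m := by
    intro m; unfold pvParN; rw [hent m]; by_cases h : m = b <;> simp [h]
  have hmono : pvMono uf' := by
    intro j hj
    rw [hlen] at hj ⊢
    rw [hent j]
    by_cases h : j = b
    · subst h; rw [if_pos rfl]
      constructor
      · exact_mod_cast Nat.le_of_lt hba
      · exact_mod_cast ha
    · simp only [h, if_false]; exact hm j hj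
  have hra : pvRoot uf' a = a := by
    apply pvRoot_fix; rw [hpar a]
    have : a ≠ b := by omega
    simp [this, hfa]
  refine ⟨hlen, hmono, ?_, ?_⟩
  · intro m hmlt
    induction hn : uf.length - m using Nat.strong_induction_on generalizing m with
    | _ n ih =>
      by_cases hmb : m = b
      · subst hmb
        have h1 : pvRoot uf' m = pvRoot uf' a := by
          have hp : pvParN uf' m = a := by rw [hpar m]; simp
          rw [pvRoot_eq, hp, if_pos ⟨hba, by rw [hlen]; exact ha⟩]
        rw [h1, hra, pvRoot_fix hfb]; simp
      · have hpm : pvParN uf' m = pvParN uf m := by rw [hpar m]; simp [hmb]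
        by_cases hfm : pvParN uf m = m
        · have h1 : pvParN uf' m = m := by rw [hpm, hfm]
          rw [pvRoot_fix h1, pvRoot_fix hfm]
          simp [hmb]
        · obtain ⟨-, hle, hlt⟩ := pvParN_cast hm hmlt
          have hmp : m < pvParN uf m := lt_of_le_of_ne hle (Ne.symm hfm)
          have h1 : pvRoot uf' m = pvRoot uf' (pvParN uf m) := by
            rw [pvRoot_eq, hpm, if_pos ⟨hmp, by rw [hlen]; exact hlt⟩]
          have h2 := ih (uf.length - pvParN uf m) (by omega) (pvParN uf m) hlt rfl
          rw [h1, h2, pvRoot_par hm hmlt]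
  · intro m
    by_cases h : m = b
    · subst h
      have hp : pvParN uf' m = a := by rw [hpar m]; simp
      rw [hp]
      constructor
      · intro hc; omega
      · rintro ⟨-, hc⟩; exact absurd rfl hc
    · rw [hpar m]; simp [h]


lemma pvFindLoop_of_fix (fuel : Nat) (uf : List Int) (x : Int)
    (h : PySem.List.pyGetD uf x 0 = x) : pvFindLoop fuel uf x = (uf, x) := by
  cases fuel with
  | zero => rfl
  | succ f => simp [pvFindLoop, h]

theorem pvFindLoop_spec : ∀ (fuel : Nat) (uf : List Int) (x : Nat), pvMono uf → x < uf.length →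
    uf.length ≤ fuel + x →
    (pvFindLoop fuel uf (x : Int)).2 = (pvRoot uf x : Int) ∧
    (pvFindLoop fuel uf (x : Int)).1.length = uf.length ∧
    pvMono (pvFindLoop fuel uf (x : Int)).1 ∧
    (∀ m, m < uf.length → pvRoot (pvFindLoop fuel uf (x : Int)).1 m = pvRoot uf m) ∧
    (∀ m, pvParN (pvFindLoop fuel uf (x : Int)).1 m = m ↔ pvParN uf m = m) ∧
    (∀ m : Nat, (pvParN uf m = m ∨ pvRoot uf x < m) →
        PySem.List.pyGetD (pvFindLoop fuel uf (x : Int)).1 (m : Int) 0 = PySem.List.pyGetD uf (m : Int) 0) ∧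
    (∀ m, m < uf.length →
        PySem.List.pyGetD (pvFindLoop fuel uf (x : Int)).1 (m : Int) 0 = PySem.List.pyGetD uf (m : Int) 0 ∨
        pvParN (pvFindLoop fuel uf (x : Int)).1 m ≤ pvRoot uf x) := by
  intro fuel
  induction fuel with
  | zero => intro uf x hm hx hf; omega
  | succ f ih =>
    intro uf x hm hx hf
    obtain ⟨hcast, hle, hlt⟩ := pvParN_cast hm hx
    by_cases hfix : pvParN uf x = x
    · have he : PySem.List.pyGetD uf (x : Int) 0 = (x : Int) := by rw [← hcast, hfix]
      rw [pvFindLoop_of_fix _ _ _ he]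
      refine ⟨by rw [pvRoot_fix hfix], rfl, hm, fun m _ => rfl, fun m => Iff.rfl,
        fun m _ => rfl, fun m _ => Or.inl rfl⟩
    · have hne : (x : Int) ≠ PySem.List.pyGetD uf (x : Int) 0 := by
        rw [← hcast]; exact_mod_cast (Ne.symm hfix)
      have hxp : x < pvParN uf x := lt_of_le_of_ne hle (Ne.symm hfix)
      obtain ⟨hcast2, hle2, hlt2⟩ := pvParN_cast hm hlt
      set w := pvParN uf (pvParN uf x) with hw
      have hxw : x < w := lt_of_lt_of_le hxp hle2
      have hval : PySem.List.pyGetD uf (PySem.List.pyGetD uf (x : Int) 0) 0 = (w : Int) := by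
        rw [← hcast, ← hcast2]
      have hroot : pvRoot uf w = pvRoot uf x := by
        rw [hw, pvRoot_par hm hlt, pvRoot_par hm hx]
      obtain ⟨hlen1, hmono1, hroots1, hfix1⟩ := pvHalve uf x w hm hx hxw hlt2 hroot hfix
      set uf1 := PySem.List.pySetD uf (x : Int) (w : Int) with huf1
      have hstep : pvFindLoop (f + 1) uf (x : Int) = pvFindLoop f uf1 (w : Int) := by
        rw [pvFindLoop, if_pos hne]
        show pvFindLoop f
            (PySem.List.pySetD uf (x : Int) (PySem.List.pyGetD uf (PySem.List.pyGetD uf (x : Int) 0) 0))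
            (PySem.List.pyGetD (PySem.List.pySetD uf (x : Int)
              (PySem.List.pyGetD uf (PySem.List.pyGetD uf (x : Int) 0) 0)) (x : Int) 0) = _
        rw [hval, pvSet_entry uf x hx _ x, if_pos rfl]
      have hw1 : w < uf1.length := by rw [hlen1]; exact hlt2
      have hf1 : uf1.length ≤ f + w := by rw [hlen1]; omega
      obtain ⟨c1, c2, c3, c4, c5, c6, c7⟩ := ih uf1 w hmono1 hw1 hf1
      rw [hstep]
      have hrw1 : pvRoot uf1 w = pvRoot uf x := by rw [hroots1 w hlt2, hroot]
      refine ⟨?_, ?_, c3, ?_, ?_, ?_, ?_⟩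
      · rw [c1, hrw1]
      · rw [c2, hlen1]
      · intro m hmlt
        rw [c4 m (by rw [hlen1]; exact hmlt), hroots1 m hmlt]
      · intro m
        rw [c5 m, hfix1 m]
      · intro m hm2
        have hmne : m ≠ x := by
          rcases hm2 with h | h
          · intro he2; exact hfix (he2 ▸ h)
          · intro he2; subst he2
            have := (pvRoot_spec hm m hx).1
            omega
        have h6 : PySem.List.pyGetD (pvFindLoop f uf1 (w : Int)).1 (m : Int) 0 =
            PySem.List.pyGetD uf1 (m : Int) 0 := by
          apply c6 m
          rcases hm2 with h | h
          · exact Or.inl ((hfix1 m).mpr h)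
          · exact Or.inr (by rw [hrw1]; exact h)
        rw [h6, pvSet_entry uf x hx _ m, if_neg hmne]
      · intro m hmlt
        rcases c7 m (by rw [hlen1]; exact hmlt) with h | h
        · by_cases hmx : m = x
          · subst hmx
            right
            have hpw : pvParN (pvFindLoop f uf1 (w : Int)).1 m = w := by
              unfold pvParN
              rw [h, pvSet_entry uf m hx _ m, if_pos rfl]
              simp
            rw [hpw]
            calc w ≤ pvRoot uf (pvParN uf m) := pvParN_le_root hm hlt
            _ = pvRoot uf m := pvRoot_par hm hx
          · left
            rw [h, pvSet_entry uf x hx _ m, if_neg hmx]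
        · right; rw [← hrw1]; exact h



theorem pvUnionA_spec (uf size : List Int) (i j : Nat) (hm : pvMono uf)
    (hi : i < uf.length) (hj : j < uf.length)
    (hfi : pvParN uf i = i)
    (hri : pvRoot uf j < i) :
    ∃ uf', pvUnionA uf size (i : Int) (j : Int) = (uf',
      PySem.List.pySetD (PySem.List.pySetD size (i : Int)
        (PySem.List.pyGetD size (i : Int) 0 + PySem.List.pyGetD size ((pvRoot uf j : Nat) : Int) 0))
        ((pvRoot uf j : Nat) : Int) 0) ∧
    uf'.length = uf.length ∧ pvMono uf' ∧
    (∀ m, m < uf.length → pvRoot uf' m = if pvRoot uf m = pvRoot uf j then i else pvRoot uf m) ∧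
    (∀ m, pvParN uf' m = m ↔ (pvParN uf m = m ∧ m ≠ pvRoot uf j)) ∧
    (∀ m : Nat, pvRoot uf j < m → PySem.List.pyGetD uf' (m : Int) 0 = PySem.List.pyGetD uf (m : Int) 0) ∧
    (∀ m, m < uf.length →
        PySem.List.pyGetD uf' (m : Int) 0 = PySem.List.pyGetD uf (m : Int) 0 ∨ pvParN uf' m ≤ i) := by
  have hei : PySem.List.pyGetD uf (i : Int) 0 = (i : Int) := by
    rw [← (pvParN_cast hm hi).1, hfi]
  set rb := pvRoot uf j with hrb
  obtain ⟨hjr, hrblt, hrbfix⟩ := pvRoot_spec hm j hj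
  obtain ⟨c1, c2, c3, c4, c5, c6, c7⟩ :=
    pvFindLoop_spec uf.length uf j hm hj (by omega)
  set uf1 := (pvFindLoop uf.length uf (j : Int)).1 with huf1
  have hfind : pvFind uf (j : Int) = (uf1, (rb : Int)) := by
    unfold pvFind
    rw [hrb, ← c1]
  have hfb1 : pvParN uf1 rb = rb := (c5 rb).mpr hrbfix
  have hfa1 : pvParN uf1 i = i := (c5 i).mpr hfi
  have hrblt1 : rb < uf1.length := by rw [c2]; exact hrblt
  have hilt1 : i < uf1.length := by rw [c2]; exact hi
  obtain ⟨l1, l2, l3, l4⟩ := pvLink uf1 rb i c3 hrblt1 hilt1 hri hfb1 hfa1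
  set uf' := PySem.List.pySetD uf1 (rb : Int) (i : Int) with huf'
  refine ⟨uf', ?_, ?_, l2, ?_, ?_, ?_, ?_⟩
  · unfold pvUnionA
    rw [show pvFind uf (i : Int) = (uf, (i : Int)) by
      unfold pvFind; rw [pvFindLoop_of_fix _ _ _ hei]]
    simp only
    rw [hfind]
  · rw [l1, c2]
  · intro m hmlt
    rw [l3 m (by rw [c2]; exact hmlt), c4 m hmlt]
  · intro m
    rw [l4 m, c5 m]
  · intro m hrbm
    have hmne : m ≠ rb := by omega
    have h1 : PySem.List.pyGetD uf' (m : Int) 0 = PySem.List.pyGetD uf1 (m : Int) 0 := by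
      rw [huf', pvSet_entry uf1 rb hrblt1 _ m, if_neg hmne]
    rw [h1]
    exact c6 m (Or.inr hrbm)
  · intro m hmlt
    by_cases hmrb : m = rb
    · right
      have hp : pvParN uf' m = i := by
        unfold pvParN
        rw [huf', pvSet_entry uf1 rb hrblt1 _ m, if_pos hmrb]
        simp
      omega
    · have h1 : PySem.List.pyGetD uf' (m : Int) 0 = PySem.List.pyGetD uf1 (m : Int) 0 := by
        rw [huf', pvSet_entry uf1 rb hrblt1 _ m, if_neg hmrb]
      have h2 : pvParN uf' m = pvParN uf1 m := by unfold pvParN; rw [h1]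
      rcases c7 m hmlt with h | h
      · left; rw [h1, h]
      · right; rw [h2]; omega

-- ---------- spec-partition lemmas ----------

def pvDisj (g h : List (Int × Int)) : Prop := ∀ q ∈ g, ∀ r ∈ h, q.1 ≠ r.1 ∧ q.2 ≠ r.2

lemma pvDisj_symm : Symmetric pvDisj := by
  intro g h hd q hq r hr
  exact ⟨(hd r hr q hq).1.symm, (hd r hr q hq).2.symm⟩

lemma pvTouch_iff (p : Int × Int) (g : List (Int × Int)) :
    pvTouch p g = true ↔ ∃ q ∈ g, q.1 = p.1 ∨ q.2 = p.2 := by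
  simp [pvTouch]

lemma pvTouch_false (p : Int × Int) (g : List (Int × Int)) :
    pvTouch p g = false ↔ ∀ q ∈ g, q.1 ≠ p.1 ∧ q.2 ≠ p.2 := by
  rw [← Bool.not_eq_true, pvTouch_iff]
  push_neg
  exact Iff.rfl

lemma pvGroups_concat (ps : List (Int × Int)) (p : Int × Int) :
    pvGroups (ps ++ [p]) = pvGStep (pvGroups ps) p := by
  simp [pvGroups, List.foldl_append]

lemma pvGStep_pairwise (gs : List (List (Int × Int))) (p : Int × Int)
    (h : gs.Pairwise pvDisj) : (pvGStep gs p).Pairwise pvDisj := by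
  unfold pvGStep
  rw [List.pairwise_append]
  refine ⟨h.sublist List.filter_sublist, List.pairwise_singleton _ _, ?_⟩
  intro g hg g' hg'
  rw [List.mem_filter] at hg
  rw [List.mem_singleton] at hg'
  subst hg'
  intro q hq r hr
  rcases List.mem_cons.mp hr with hr | hr
  · have hd := (pvTouch_false p g).mp (by simpa using hg.2) q hq
    rw [hr]
    exact hd
  · rw [List.mem_flatten] at hr
    obtain ⟨h2, hh2, hrh2⟩ := hr
    rw [List.mem_filter] at hh2
    have hne : g ≠ h2 := by
      intro he; rw [he] at hg; rw [hh2.2] at hg; simp at hg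
    exact (List.Pairwise.forall pvDisj_symm h) hg.1 hh2.1 hne q hq r hrh2

lemma pvGroups_pairwise (ps : List (Int × Int)) : (pvGroups ps).Pairwise pvDisj := by
  suffices h : ∀ (l : List (Int × Int)) (gs : List (List (Int × Int))), gs.Pairwise pvDisj →
      (l.foldl pvGStep gs).Pairwise pvDisj by
    exact h ps [] (List.Pairwise.nil)
  intro l
  induction l with
  | nil => intro gs h; exact h
  | cons p t ih => intro gs h; exact ih _ (pvGStep_pairwise gs p h)

-- ---------- small list utilities ----------

lemma pvNodupKey {β : Type} {L : List (Nat × β)} (h : (L.map Prod.fst).Nodup) {e f : Nat × β}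
    (he : e ∈ L) (hf : f ∈ L) (heq : e.1 = f.1) : e = f := by
  by_cases hef : e = f
  · exact hef
  · rw [List.nodup_iff_injective_getElem] at h
    obtain ⟨ie, hie, hegete⟩ := List.mem_iff_getElem.mp he
    obtain ⟨jf, hjf, hfgetf⟩ := List.mem_iff_getElem.mp hf
    have hlen : L.length = (L.map Prod.fst).length := by simp
    have : (⟨ie, by omega⟩ : Fin (L.map Prod.fst).length) = ⟨jf, by omega⟩ := by
      apply h
      simp only [List.getElem_map]
      rw [hegete, hfgetf]; exact heq
    have : ie = jf := by simpa using this
    subst this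
    rw [← hegete, ← hfgetf] at hef
    exact absurd rfl hef

lemma pvSingletonOf {α : Type} (l : List α) (hnd : l.Nodup) (e : α) (he : e ∈ l)
    (hall : ∀ z ∈ l, z = e) : l = [e] := by
  cases l with
  | nil => simp at he
  | cons c t =>
    have hc : c = e := hall c (List.mem_cons_self)
    subst hc
    have ht : t = [] := by
      rw [List.eq_nil_iff_forall_not_mem]
      intro z hz
      have := hall z (List.mem_cons_of_mem _ hz)
      subst this
      exact (List.nodup_cons.mp hnd).1 hz
    rw [ht]

lemma pvPairOf {α : Type} (l : List α) (hnd : l.Nodup) (a b : α) (hab : a ≠ b)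
    (ha : a ∈ l) (hb : b ∈ l) (hall : ∀ z ∈ l, z = a ∨ z = b) : l.Perm [a, b] := by
  cases l with
  | nil => simp at ha
  | cons c t =>
    obtain ⟨hct, htnd⟩ := List.nodup_cons.mp hnd
    rcases hall c List.mem_cons_self with hc | hc
    · have hbt : b ∈ t := by
        rcases List.mem_cons.mp hb with h | h
        · exact absurd (h.trans hc) (Ne.symm hab)
        · exact h
      have ht : t = [b] := by
        apply pvSingletonOf t htnd b hbt
        intro z hz
        rcases hall z (List.mem_cons_of_mem _ hz) with h | h
        · exfalso; rw [h, ← hc] at hz; exact hct hz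
        · exact h
      rw [hc, ht]
    · have hat : a ∈ t := by
        rcases List.mem_cons.mp ha with h | h
        · exact absurd (h.trans hc) hab
        · exact h
      have ht : t = [a] := by
        apply pvSingletonOf t htnd a hat
        intro z hz
        rcases hall z (List.mem_cons_of_mem _ hz) with h | h
        · exact h
        · exfalso; rw [h, ← hc] at hz; exact hct hz
      rw [hc, ht]
      exact List.Perm.swap a b []

-- ---------- the loop invariant ----------

structure pvInvL (n : Nat) (pre : List (Int × Int)) (uf size : List Int)
    (rx ry : PySem.Dict Int Int) (L : List (Nat × List (Int × Int))) : Prop where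
  ufLen : uf.length = n
  szLen : size.length = n
  kLe : pre.length ≤ n
  tailUf : ∀ j : Nat, pre.length ≤ j → j < n → PySem.List.pyGetD uf (j : Int) 0 = (j : Int)
  tailSz : ∀ j : Nat, pre.length ≤ j → j < n → PySem.List.pyGetD size (j : Int) 0 = 1
  mono : pvMono uf
  closed : ∀ j : Nat, j < pre.length → pvParN uf j < pre.length
  grpEq : pvGroups pre = L.map Prod.snd
  keyNodup : (L.map Prod.fst).Nodup
  entries : ∀ e ∈ L, e.1 < pre.length ∧ pvParN uf e.1 = e.1 ∧
      PySem.List.pyGetD size (e.1 : Int) 0 = (e.2.length : Int) ∧ (∀ q ∈ e.2, q ∈ pre)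
  rootsIn : ∀ j : Nat, j < pre.length → pvParN uf j = j → ∃ e ∈ L, e.1 = j
  nonRoot : ∀ j : Nat, j < pre.length → (∀ e ∈ L, e.1 ≠ j) → PySem.List.pyGetD size (j : Int) 0 = 0
  rxSome : ∀ x : Int, (rx.get? x).isSome = true ↔ ∃ q ∈ pre, q.1 = x
  rxVal : ∀ x v, rx.get? x = some v → 0 ≤ v ∧ v < (pre.length : Int) ∧
      ∃ e ∈ L, (∃ q ∈ e.2, q.1 = x) ∧ pvRoot uf v.toNat = e.1
  rySome : ∀ y : Int, (ry.get? y).isSome = true ↔ ∃ q ∈ pre, q.2 = y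
  ryVal : ∀ y v, ry.get? y = some v → 0 ≤ v ∧ v < (pre.length : Int) ∧
      ∃ e ∈ L, (∃ q ∈ e.2, q.2 = y) ∧ pvRoot uf v.toNat = e.1


lemma pvGStep_map (L : List (Nat × List (Int × Int))) (p : Int × Int) :
    pvGStep (L.map Prod.snd) p =
      (L.filter (fun e => !pvTouch p e.2)).map Prod.snd ++
        [p :: ((L.filter (fun e => pvTouch p e.2)).map Prod.snd).flatten] := by
  unfold pvGStep
  rw [List.filter_map, List.filter_map]
  rfl

lemma pvStep_none_none (n : Nat) (pre : List (Int × Int)) (a b : Int)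
    (uf size : List Int) (rx ry : PySem.Dict Int Int) (L : List (Nat × List (Int × Int)))
    (hinv : pvInvL n pre uf size rx ry L) (hlt : pre.length < n)
    (hx : rx.get? a = none) (hy : ry.get? b = none) :
    ∃ L', pvInvL n (pre ++ [(a, b)]) uf size
      (rx.insert a (pre.length : Int)) (ry.insert b (pre.length : Int)) L' := by
  obtain ⟨ufLen, szLen, kLe, tailUf, tailSz, mono, closed, grpEq, keyNodup, entries,
    rootsIn, nonRoot, rxSome, rxVal, rySome, ryVal⟩ := hinv
  set k := pre.length with hk
  have hklen : (pre ++ [(a, b)]).length = k + 1 := by simp [hk]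
  have hparK : pvParN uf k = k := by
    unfold pvParN; rw [tailUf k le_rfl hlt]; simp
  have hnoX : ∀ q ∈ pre, q.1 ≠ a := by
    intro q hq he
    have h1 : (rx.get? a).isSome = true := (rxSome a).mpr ⟨q, hq, he⟩
    rw [hx] at h1; simp at h1
  have hnoY : ∀ q ∈ pre, q.2 ≠ b := by
    intro q hq he
    have h1 : (ry.get? b).isSome = true := (rySome b).mpr ⟨q, hq, he⟩
    rw [hy] at h1; simp at h1
  have hTouchF : ∀ e ∈ L, pvTouch (a, b) e.2 = false := by
    intro e he
    rw [pvTouch_false]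
    intro q hq
    have hqpre := (entries e he).2.2.2 q hq
    exact ⟨hnoX q hqpre, hnoY q hqpre⟩
  have hfilter1 : L.filter (fun e => pvTouch (a, b) e.2) = [] := by
    rw [List.filter_eq_nil_iff]
    intro e he
    rw [hTouchF e he]; simp
  have hfilter2 : L.filter (fun e => !pvTouch (a, b) e.2) = L := by
    rw [List.filter_eq_self]
    intro e he
    rw [hTouchF e he]; rfl
  refine ⟨L ++ [(k, [(a, b)])], ?_, ?_, ?_, ?_, ?_, ?_, ?_, ?_, ?_, ?_, ?_, ?_, ?_, ?_, ?_, ?_⟩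
  · exact ufLen
  · exact szLen
  · rw [hklen]; omega
  · intro j hj1 hj2; exact tailUf j (by rw [hklen] at hj1; omega) hj2
  · intro j hj1 hj2; exact tailSz j (by rw [hklen] at hj1; omega) hj2
  · exact mono
  · intro j hj
    rw [hklen] at hj
    rcases Nat.lt_succ_iff_lt_or_eq.mp hj with h | h
    · have := closed j h; omega
    · subst h; rw [hparK]; omega
  · rw [pvGroups_concat, grpEq, pvGStep_map, hfilter1, hfilter2]
    simp
  · rw [List.map_append]
    simp only [List.map_cons, List.map_nil]
    rw [List.nodup_append]
    refine ⟨keyNodup, List.nodup_singleton _, ?_⟩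
    intro r hr
    have : r < k := by
      rw [List.mem_map] at hr
      obtain ⟨e, he, hre⟩ := hr
      have := (entries e he).1
      omega
    simp only [List.mem_singleton]
    omega
  · intro e he
    rcases List.mem_append.mp he with h | h
    · obtain ⟨h1, h2, h3, h4⟩ := entries e h
      exact ⟨by rw [hklen]; omega, h2, h3, fun q hq => List.mem_append_left _ (h4 q hq)⟩
    · rw [List.mem_singleton] at h
      subst h
      refine ⟨by rw [hklen]; omega, hparK, ?_, ?_⟩
      · rw [tailSz k le_rfl hlt]; simp
      · intro q hq
        rw [List.mem_singleton] at hq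
        subst hq
        exact List.mem_append_right _ (List.mem_singleton.mpr rfl)
  · intro j hj hfj
    rw [hklen] at hj
    rcases Nat.lt_succ_iff_lt_or_eq.mp hj with h | h
    · obtain ⟨e, he, hej⟩ := rootsIn j h hfj
      exact ⟨e, List.mem_append_left _ he, hej⟩
    · subst h
      exact ⟨(k, [(a, b)]), List.mem_append_right _ (List.mem_singleton.mpr rfl), rfl⟩
  · intro j hj hne
    rw [hklen] at hj
    have hjk : j ≠ k := by
      intro he
      exact hne (k, [(a, b)]) (List.mem_append_right _ (List.mem_singleton.mpr rfl)) (by rw [he])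
    exact nonRoot j (by omega) (fun e he => hne e (List.mem_append_left _ he))
  · intro x
    rw [PySem.Dict.get?_insert]
    by_cases hxa : x = a
    · subst hxa
      rw [if_pos rfl]
      constructor
      · intro _
        exact ⟨(x, b), List.mem_append_right _ (List.mem_singleton.mpr rfl), rfl⟩
      · intro _; rfl
    · rw [if_neg hxa, rxSome x]
      constructor
      · rintro ⟨q, hq, hqx⟩; exact ⟨q, List.mem_append_left _ hq, hqx⟩
      · rintro ⟨q, hq, hqx⟩
        rcases List.mem_append.mp hq with h | h
        · exact ⟨q, h, hqx⟩
        · rw [List.mem_singleton] at h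
          subst h
          exact absurd hqx.symm hxa
  · intro x v hv
    rw [PySem.Dict.get?_insert] at hv
    by_cases hxa : x = a
    · rw [if_pos hxa] at hv
      have hvk : v = (k : Int) := by injection hv with h1; exact h1.symm
      subst hvk
      refine ⟨Int.natCast_nonneg k, by rw [hklen]; push_cast; omega,
        (k, [(a, b)]), List.mem_append_right _ (List.mem_singleton.mpr rfl),
        ⟨(a, b), List.mem_singleton.mpr rfl, by rw [hxa]⟩, ?_⟩
      simp only [Int.toNat_natCast]
      exact pvRoot_fix hparK
    · rw [if_neg hxa] at hv
      obtain ⟨h1, h2, e, he, hq, hr⟩ := rxVal x v hv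
      exact ⟨h1, by rw [hklen]; push_cast at h2 ⊢; omega, e, List.mem_append_left _ he, hq, hr⟩
  · intro y
    rw [PySem.Dict.get?_insert]
    by_cases hyb : y = b
    · subst hyb
      rw [if_pos rfl]
      constructor
      · intro _
        exact ⟨(a, y), List.mem_append_right _ (List.mem_singleton.mpr rfl), rfl⟩
      · intro _; rfl
    · rw [if_neg hyb, rySome y]
      constructor
      · rintro ⟨q, hq, hqy⟩; exact ⟨q, List.mem_append_left _ hq, hqy⟩
      · rintro ⟨q, hq, hqy⟩
        rcases List.mem_append.mp hq with h | h
        · exact ⟨q, h, hqy⟩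
        · rw [List.mem_singleton] at h
          subst h
          exact absurd hqy.symm hyb
  · intro y v hv
    rw [PySem.Dict.get?_insert] at hv
    by_cases hyb : y = b
    · rw [if_pos hyb] at hv
      have hvk : v = (k : Int) := by injection hv with h1; exact h1.symm
      subst hvk
      refine ⟨Int.natCast_nonneg k, by rw [hklen]; push_cast; omega,
        (k, [(a, b)]), List.mem_append_right _ (List.mem_singleton.mpr rfl),
        ⟨(a, b), List.mem_singleton.mpr rfl, by rw [hyb]⟩, ?_⟩
      simp only [Int.toNat_natCast]
      exact pvRoot_fix hparK
    · rw [if_neg hyb] at hv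
      obtain ⟨h1, h2, e, he, hq, hr⟩ := ryVal y v hv
      exact ⟨h1, by rw [hklen]; push_cast at h2 ⊢; omega, e, List.mem_append_left _ he, hq, hr⟩

lemma pvStep_some_none (n : Nat) (pre : List (Int × Int)) (a b : Int)
    (uf size : List Int) (rx ry : PySem.Dict Int Int) (L : List (Nat × List (Int × Int)))
    (hinv : pvInvL n pre uf size rx ry L) (hlt : pre.length < n)
    (v : Int) (hx : rx.get? a = some v) (hy : ry.get? b = none) :
    ∃ L', pvInvL n (pre ++ [(a, b)])
      (pvUnionA uf size ((pre.length : Nat) : Int) v).1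
      (pvUnionA uf size ((pre.length : Nat) : Int) v).2
      (rx.insert a (pre.length : Int)) (ry.insert b (pre.length : Int)) L' := by
  obtain ⟨ufLen, szLen, kLe, tailUf, tailSz, mono, closed, grpEq, keyNodup, entries,
    rootsIn, nonRoot, rxSome, rxVal, rySome, ryVal⟩ := hinv
  set k := pre.length with hk
  have hklen : (pre ++ [(a, b)]).length = k + 1 := by simp [hk]
  have hparK : pvParN uf k = k := by
    unfold pvParN; rw [tailUf k le_rfl hlt]; simp
  obtain ⟨h0v, hvk, e1, he1, ⟨q1, hq1, hq1a⟩, hroot1⟩ := rxVal a v hx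
  obtain ⟨jx, rfl⟩ : ∃ jx : Nat, v = (jx : Int) := ⟨v.toNat, (Int.toNat_of_nonneg h0v).symm⟩
  rw [Int.toNat_natCast] at hroot1
  have hjxk : jx < k := by exact_mod_cast hvk
  obtain ⟨hr1k, hfixr1, hsz1, hmem1⟩ := entries e1 he1
  have hnoY : ∀ q ∈ pre, q.2 ≠ b := by
    intro q hq he
    have h1 : (ry.get? b).isSome = true := (rySome b).mpr ⟨q, hq, he⟩
    rw [hy] at h1; simp at h1
  have hLnodup : L.Nodup := keyNodup.of_map
  have hLpw : L.Pairwise (fun e f => pvDisj e.2 f.2) := by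
    have h1 := pvGroups_pairwise pre
    rw [grpEq, List.pairwise_map] at h1
    exact h1
  have he1T : pvTouch (a, b) e1.2 = true :=
    (pvTouch_iff _ _).mpr ⟨q1, hq1, Or.inl hq1a⟩
  have hall : ∀ e ∈ L, pvTouch (a, b) e.2 = true → e = e1 := by
    intro e he ht
    obtain ⟨q, hq, hqab⟩ := (pvTouch_iff _ _).mp ht
    rcases hqab with hqa | hqb
    · by_cases hee : e = e1
      · exact hee
      · have hd := List.Pairwise.forall (fun e f h q hq r hr =>
          ⟨(h r hr q hq).1.symm, (h r hr q hq).2.symm⟩) hLpw he he1 hee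
        exact absurd (hqa.trans hq1a.symm) (hd q hq q1 hq1).1
    · exact absurd hqb (hnoY q ((entries e he).2.2.2 q hq))
  have hone : L.filter (fun e => pvTouch (a, b) e.2) = [e1] := by
    apply pvSingletonOf _ (hLnodup.filter _) e1 (List.mem_filter.mpr ⟨he1, he1T⟩)
    intro z hz
    rw [List.mem_filter] at hz
    exact hall z hz.1 hz.2
  have hkept : ∀ e ∈ L.filter (fun e => !pvTouch (a, b) e.2),
      e ∈ L ∧ e.1 ≠ e1.1 ∧ e.1 < k := by
    intro e he
    rw [List.mem_filter] at he
    refine ⟨he.1, ?_, (entries e he.1).1⟩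
    intro hee
    have : e = e1 := pvNodupKey keyNodup he.1 he1 hee
    rw [this] at he
    rw [he1T] at he
    simp at he
  -- the union
  have hjxn : jx < uf.length := by rw [ufLen]; omega
  have hkn : k < uf.length := by rw [ufLen]; omega
  have hri : pvRoot uf jx < k := by rw [hroot1]; exact hr1k
  obtain ⟨uf', hufeq, hlen', hmono', hroots', hfix', habove', hclo'⟩ :=
    pvUnionA_spec uf size k jx mono hkn hjxn hparK (by rw [hroot1]; omega)
  rw [hroot1] at hufeq hroots' hfix' habove'
  have hr1n : e1.1 < size.length := by rw [szLen]; omega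
  have hkn2 : k < size.length := by rw [szLen]; omega
  have hkr1 : k ≠ e1.1 := by omega
  set size' := PySem.List.pySetD (PySem.List.pySetD size (k : Int)
      (PySem.List.pyGetD size (k : Int) 0 + PySem.List.pyGetD size ((e1.1 : Nat) : Int) 0))
      ((e1.1 : Nat) : Int) 0 with hsize'
  have hszlen' : size'.length = n := by
    rw [hsize', pvSet_len, pvSet_len]; exact szLen
  have hSz : ∀ m : Nat, PySem.List.pyGetD size' (m : Int) 0 =
      if m = e1.1 then 0 else if m = k then 1 + (e1.2.length : Int)
      else PySem.List.pyGetD size (m : Int) 0 := by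
    intro m
    rw [hsize', pvSet_entry _ e1.1 (by rw [pvSet_len]; exact hr1n) _ m]
    by_cases h1 : m = e1.1
    · rw [if_pos h1, if_pos h1]
    · rw [if_neg h1, if_neg h1, pvSet_entry _ k hkn2 _ m]
      by_cases h2 : m = k
      · rw [if_pos h2, if_pos h2, tailSz k le_rfl hlt, hsz1]
      · rw [if_neg h2, if_neg h2]
  have hres1 : (pvUnionA uf size ((k : Nat) : Int) ((jx : Nat) : Int)).1 = uf' := by
    rw [hufeq]
  have hres2 : (pvUnionA uf size ((k : Nat) : Int) ((jx : Nat) : Int)).2 = size' := by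
    rw [hufeq]
  have hparNew : ∀ m : Nat, e1.1 < m → pvParN uf' m = pvParN uf m := by
    intro m hm; unfold pvParN; rw [habove' m hm]
  have hparK' : pvParN uf' k = k := by rw [hparNew k (by omega)]; exact hparK
  refine ⟨L.filter (fun e => !pvTouch (a, b) e.2) ++ [(k, (a, b) :: e1.2)],
    ?_, ?_, ?_, ?_, ?_, ?_, ?_, ?_, ?_, ?_, ?_, ?_, ?_, ?_, ?_, ?_⟩
  · rw [hres1, hlen', ufLen]
  · rw [hres2]; exact hszlen'
  · rw [hklen]; omega
  · intro j hj1 hj2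
    rw [hres1]
    rw [hklen] at hj1
    rw [habove' j (by omega)]
    exact tailUf j (by omega) hj2
  · intro j hj1 hj2
    rw [hres2]
    rw [hklen] at hj1
    rw [hSz j, if_neg (by omega), if_neg (by omega)]
    exact tailSz j (by omega) hj2
  · rw [hres1]; exact hmono'
  · intro j hj
    rw [hres1]
    rw [hklen] at hj
    have hjn : j < uf.length := by rw [ufLen]; omega
    rcases hclo' j hjn with h | h
    · have : pvParN uf' j = pvParN uf j := by unfold pvParN; rw [h]
      rw [this]
      rcases Nat.lt_succ_iff_lt_or_eq.mp hj with h2 | h2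
      · have := closed j h2; omega
      · subst h2; rw [hparK]; omega
    · omega
  · rw [pvGroups_concat, grpEq, pvGStep_map, hone]
    simp
  · rw [List.map_append]
    simp only [List.map_cons, List.map_nil]
    rw [List.nodup_append]
    refine ⟨(keyNodup.sublist (List.Sublist.map Prod.fst List.filter_sublist)), List.nodup_singleton _, ?_⟩
    intro r hr
    rw [List.mem_map] at hr
    obtain ⟨e, he, hre⟩ := hr
    have := (hkept e he).2.2
    simp only [List.mem_singleton]
    omega
  · intro e he
    rw [hres1, hres2]
    rcases List.mem_append.mp he with h | h
    · obtain ⟨heL, hner1, hlek⟩ := hkept e h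
      obtain ⟨h1, h2, h3, h4⟩ := entries e heL
      refine ⟨by rw [hklen]; omega, ?_, ?_, fun q hq => List.mem_append_left _ (h4 q hq)⟩
      · rw [hfix' e.1]; exact ⟨h2, hner1⟩
      · rw [hSz e.1, if_neg hner1, if_neg (by omega)]; exact h3
    · rw [List.mem_singleton] at h
      subst h
      refine ⟨by rw [hklen]; omega, hparK', ?_, ?_⟩
      · rw [hSz k, if_neg hkr1, if_pos rfl]
        simp only [List.length_cons]
        push_cast; ring
      · intro q hq
        rcases List.mem_cons.mp hq with h | h
        · subst h; exact List.mem_append_right _ (List.mem_singleton.mpr rfl)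
        · exact List.mem_append_left _ (hmem1 q h)
  · intro j hj hfj
    rw [hklen] at hj
    rw [hres1] at hfj
    rw [hfix' j] at hfj
    rcases Nat.lt_succ_iff_lt_or_eq.mp hj with h | h
    · obtain ⟨e, he, hej⟩ := rootsIn j h hfj.1
      have heT : pvTouch (a, b) e.2 = false := by
        by_cases ht : pvTouch (a, b) e.2 = true
        · exfalso
          have h9 := hall e he ht
          rw [h9] at hej
          exact hfj.2 hej.symm
        · exact Bool.eq_false_iff.mpr ht
      refine ⟨e, List.mem_append_left _ (List.mem_filter.mpr ⟨he, by rw [heT]; rfl⟩), hej⟩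
    · subst h
      exact ⟨(k, (a, b) :: e1.2), List.mem_append_right _ (List.mem_singleton.mpr rfl), rfl⟩
  · intro j hj hne
    rw [hklen] at hj
    rw [hres2]
    have hjk : j ≠ k := by
      intro he
      exact hne (k, (a, b) :: e1.2) (List.mem_append_right _ (List.mem_singleton.mpr rfl)) (by rw [he])
    by_cases hjr1 : j = e1.1
    · rw [hSz j, if_pos hjr1]
    · rw [hSz j, if_neg hjr1, if_neg hjk]
      apply nonRoot j (by omega)
      intro e he hej
      by_cases ht : pvTouch (a, b) e.2 = true
      · have := hall e he ht
        rw [this] at hej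
        exact hjr1 hej.symm
      · exact hne e (List.mem_append_left _
          (List.mem_filter.mpr ⟨he, by rw [Bool.eq_false_iff.mpr ht]; rfl⟩)) hej
  · intro x
    rw [PySem.Dict.get?_insert]
    by_cases hxa : x = a
    · subst hxa
      rw [if_pos rfl]
      constructor
      · intro _
        exact ⟨(x, b), List.mem_append_right _ (List.mem_singleton.mpr rfl), rfl⟩
      · intro _; rfl
    · rw [if_neg hxa, rxSome x]
      constructor
      · rintro ⟨q, hq, hqx⟩; exact ⟨q, List.mem_append_left _ hq, hqx⟩
      · rintro ⟨q, hq, hqx⟩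
        rcases List.mem_append.mp hq with h | h
        · exact ⟨q, h, hqx⟩
        · rw [List.mem_singleton] at h
          subst h
          exact absurd hqx.symm hxa
  · intro x w hw
    rw [hres1]
    rw [PySem.Dict.get?_insert] at hw
    by_cases hxa : x = a
    · rw [if_pos hxa] at hw
      have hvk2 : w = (k : Int) := by injection hw with h1; exact h1.symm
      subst hvk2
      refine ⟨Int.natCast_nonneg k, by rw [hklen]; push_cast; omega,
        (k, (a, b) :: e1.2), List.mem_append_right _ (List.mem_singleton.mpr rfl),
        ⟨(a, b), List.mem_cons_self, by rw [hxa]⟩, ?_⟩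
      simp only [Int.toNat_natCast]
      exact pvRoot_fix hparK'
    · rw [if_neg hxa] at hw
      obtain ⟨h1, h2, e, he, ⟨q, hq, hqx⟩, hr⟩ := rxVal x w hw
      have hwn : w.toNat < uf.length := by rw [ufLen]; omega
      refine ⟨h1, by rw [hklen]; push_cast at h2 ⊢; omega, ?_⟩
      by_cases ht : pvTouch (a, b) e.2 = true
      · have hee1 : e = e1 := hall e he ht
        refine ⟨(k, (a, b) :: e1.2), List.mem_append_right _ (List.mem_singleton.mpr rfl),
          ⟨q, List.mem_cons_of_mem _ (hee1 ▸ hq), hqx⟩, ?_⟩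
        rw [hroots' w.toNat hwn, hr, hee1]
        rw [if_pos rfl]
      · have hkm : e ∈ L.filter (fun e => !pvTouch (a, b) e.2) :=
          List.mem_filter.mpr ⟨he, by rw [Bool.eq_false_iff.mpr ht]; rfl⟩
        obtain ⟨-, hner1, -⟩ := hkept e hkm
        refine ⟨e, List.mem_append_left _ hkm, ⟨q, hq, hqx⟩, ?_⟩
        rw [hroots' w.toNat hwn, hr, if_neg hner1]
  · intro y
    rw [PySem.Dict.get?_insert]
    by_cases hyb : y = b
    · subst hyb
      rw [if_pos rfl]
      constructor
      · intro _
        exact ⟨(a, y), List.mem_append_right _ (List.mem_singleton.mpr rfl), rfl⟩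
      · intro _; rfl
    · rw [if_neg hyb, rySome y]
      constructor
      · rintro ⟨q, hq, hqy⟩; exact ⟨q, List.mem_append_left _ hq, hqy⟩
      · rintro ⟨q, hq, hqy⟩
        rcases List.mem_append.mp hq with h | h
        · exact ⟨q, h, hqy⟩
        · rw [List.mem_singleton] at h
          subst h
          exact absurd hqy.symm hyb
  · intro y w hw
    rw [hres1]
    rw [PySem.Dict.get?_insert] at hw
    by_cases hyb : y = b
    · rw [if_pos hyb] at hw
      have hvk2 : w = (k : Int) := by injection hw with h1; exact h1.symm
      subst hvk2
      refine ⟨Int.natCast_nonneg k, by rw [hklen]; push_cast; omega,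
        (k, (a, b) :: e1.2), List.mem_append_right _ (List.mem_singleton.mpr rfl),
        ⟨(a, b), List.mem_cons_self, by rw [hyb]⟩, ?_⟩
      simp only [Int.toNat_natCast]
      exact pvRoot_fix hparK'
    · rw [if_neg hyb] at hw
      obtain ⟨h1, h2, e, he, ⟨q, hq, hqy⟩, hr⟩ := ryVal y w hw
      have hwn : w.toNat < uf.length := by rw [ufLen]; omega
      refine ⟨h1, by rw [hklen]; push_cast at h2 ⊢; omega, ?_⟩
      by_cases ht : pvTouch (a, b) e.2 = true
      · have hee1 : e = e1 := hall e he ht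
        refine ⟨(k, (a, b) :: e1.2), List.mem_append_right _ (List.mem_singleton.mpr rfl),
          ⟨q, List.mem_cons_of_mem _ (hee1 ▸ hq), hqy⟩, ?_⟩
        rw [hroots' w.toNat hwn, hr, hee1]
        rw [if_pos rfl]
      · have hkm : e ∈ L.filter (fun e => !pvTouch (a, b) e.2) :=
          List.mem_filter.mpr ⟨he, by rw [Bool.eq_false_iff.mpr ht]; rfl⟩
        obtain ⟨-, hner1, -⟩ := hkept e hkm
        refine ⟨e, List.mem_append_left _ hkm, ⟨q, hq, hqy⟩, ?_⟩
        rw [hroots' w.toNat hwn, hr, if_neg hner1]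

lemma pvStep_none_some (n : Nat) (pre : List (Int × Int)) (a b : Int)
    (uf size : List Int) (rx ry : PySem.Dict Int Int) (L : List (Nat × List (Int × Int)))
    (hinv : pvInvL n pre uf size rx ry L) (hlt : pre.length < n)
    (v : Int) (hx : rx.get? a = none) (hy : ry.get? b = some v) :
    ∃ L', pvInvL n (pre ++ [(a, b)])
      (pvUnionA uf size ((pre.length : Nat) : Int) v).1
      (pvUnionA uf size ((pre.length : Nat) : Int) v).2
      (rx.insert a (pre.length : Int)) (ry.insert b (pre.length : Int)) L' := by
  obtain ⟨ufLen, szLen, kLe, tailUf, tailSz, mono, closed, grpEq, keyNodup, entries,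
    rootsIn, nonRoot, rxSome, rxVal, rySome, ryVal⟩ := hinv
  set k := pre.length with hk
  have hklen : (pre ++ [(a, b)]).length = k + 1 := by simp [hk]
  have hparK : pvParN uf k = k := by
    unfold pvParN; rw [tailUf k le_rfl hlt]; simp
  obtain ⟨h0v, hvk, e1, he1, ⟨q1, hq1, hq1b⟩, hroot1⟩ := ryVal b v hy
  obtain ⟨jx, rfl⟩ : ∃ jx : Nat, v = (jx : Int) := ⟨v.toNat, (Int.toNat_of_nonneg h0v).symm⟩
  rw [Int.toNat_natCast] at hroot1
  have hjxk : jx < k := by exact_mod_cast hvk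
  obtain ⟨hr1k, hfixr1, hsz1, hmem1⟩ := entries e1 he1
  have hnoX : ∀ q ∈ pre, q.1 ≠ a := by
    intro q hq he
    have h1 : (rx.get? a).isSome = true := (rxSome a).mpr ⟨q, hq, he⟩
    rw [hx] at h1; simp at h1
  have hLnodup : L.Nodup := keyNodup.of_map
  have hLpw : L.Pairwise (fun e f => pvDisj e.2 f.2) := by
    have h1 := pvGroups_pairwise pre
    rw [grpEq, List.pairwise_map] at h1
    exact h1
  have he1T : pvTouch (a, b) e1.2 = true :=
    (pvTouch_iff _ _).mpr ⟨q1, hq1, Or.inr hq1b⟩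
  have hall : ∀ e ∈ L, pvTouch (a, b) e.2 = true → e = e1 := by
    intro e he ht
    obtain ⟨q, hq, hqab⟩ := (pvTouch_iff _ _).mp ht
    rcases hqab with hqa | hqb
    · exact absurd hqa (hnoX q ((entries e he).2.2.2 q hq))
    · by_cases hee : e = e1
      · exact hee
      · have hd := List.Pairwise.forall (fun e f h q hq r hr =>
          ⟨(h r hr q hq).1.symm, (h r hr q hq).2.symm⟩) hLpw he he1 hee
        exact absurd (hqb.trans hq1b.symm) (hd q hq q1 hq1).2
  have hone : L.filter (fun e => pvTouch (a, b) e.2) = [e1] := by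
    apply pvSingletonOf _ (hLnodup.filter _) e1 (List.mem_filter.mpr ⟨he1, he1T⟩)
    intro z hz
    rw [List.mem_filter] at hz
    exact hall z hz.1 hz.2
  have hkept : ∀ e ∈ L.filter (fun e => !pvTouch (a, b) e.2),
      e ∈ L ∧ e.1 ≠ e1.1 ∧ e.1 < k := by
    intro e he
    rw [List.mem_filter] at he
    refine ⟨he.1, ?_, (entries e he.1).1⟩
    intro hee
    have : e = e1 := pvNodupKey keyNodup he.1 he1 hee
    rw [this] at he
    rw [he1T] at he
    simp at he
  -- the union
  have hjxn : jx < uf.length := by rw [ufLen]; omega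
  have hkn : k < uf.length := by rw [ufLen]; omega
  have hri : pvRoot uf jx < k := by rw [hroot1]; exact hr1k
  obtain ⟨uf', hufeq, hlen', hmono', hroots', hfix', habove', hclo'⟩ :=
    pvUnionA_spec uf size k jx mono hkn hjxn hparK (by rw [hroot1]; omega)
  rw [hroot1] at hufeq hroots' hfix' habove'
  have hr1n : e1.1 < size.length := by rw [szLen]; omega
  have hkn2 : k < size.length := by rw [szLen]; omega
  have hkr1 : k ≠ e1.1 := by omega
  set size' := PySem.List.pySetD (PySem.List.pySetD size (k : Int)
      (PySem.List.pyGetD size (k : Int) 0 + PySem.List.pyGetD size ((e1.1 : Nat) : Int) 0))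
      ((e1.1 : Nat) : Int) 0 with hsize'
  have hszlen' : size'.length = n := by
    rw [hsize', pvSet_len, pvSet_len]; exact szLen
  have hSz : ∀ m : Nat, PySem.List.pyGetD size' (m : Int) 0 =
      if m = e1.1 then 0 else if m = k then 1 + (e1.2.length : Int)
      else PySem.List.pyGetD size (m : Int) 0 := by
    intro m
    rw [hsize', pvSet_entry _ e1.1 (by rw [pvSet_len]; exact hr1n) _ m]
    by_cases h1 : m = e1.1
    · rw [if_pos h1, if_pos h1]
    · rw [if_neg h1, if_neg h1, pvSet_entry _ k hkn2 _ m]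
      by_cases h2 : m = k
      · rw [if_pos h2, if_pos h2, tailSz k le_rfl hlt, hsz1]
      · rw [if_neg h2, if_neg h2]
  have hres1 : (pvUnionA uf size ((k : Nat) : Int) ((jx : Nat) : Int)).1 = uf' := by
    rw [hufeq]
  have hres2 : (pvUnionA uf size ((k : Nat) : Int) ((jx : Nat) : Int)).2 = size' := by
    rw [hufeq]
  have hparNew : ∀ m : Nat, e1.1 < m → pvParN uf' m = pvParN uf m := by
    intro m hm; unfold pvParN; rw [habove' m hm]
  have hparK' : pvParN uf' k = k := by rw [hparNew k (by omega)]; exact hparK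
  refine ⟨L.filter (fun e => !pvTouch (a, b) e.2) ++ [(k, (a, b) :: e1.2)],
    ?_, ?_, ?_, ?_, ?_, ?_, ?_, ?_, ?_, ?_, ?_, ?_, ?_, ?_, ?_, ?_⟩
  · rw [hres1, hlen', ufLen]
  · rw [hres2]; exact hszlen'
  · rw [hklen]; omega
  · intro j hj1 hj2
    rw [hres1]
    rw [hklen] at hj1
    rw [habove' j (by omega)]
    exact tailUf j (by omega) hj2
  · intro j hj1 hj2
    rw [hres2]
    rw [hklen] at hj1
    rw [hSz j, if_neg (by omega), if_neg (by omega)]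
    exact tailSz j (by omega) hj2
  · rw [hres1]; exact hmono'
  · intro j hj
    rw [hres1]
    rw [hklen] at hj
    have hjn : j < uf.length := by rw [ufLen]; omega
    rcases hclo' j hjn with h | h
    · have : pvParN uf' j = pvParN uf j := by unfold pvParN; rw [h]
      rw [this]
      rcases Nat.lt_succ_iff_lt_or_eq.mp hj with h2 | h2
      · have := closed j h2; omega
      · subst h2; rw [hparK]; omega
    · omega
  · rw [pvGroups_concat, grpEq, pvGStep_map, hone]
    simp
  · rw [List.map_append]
    simp only [List.map_cons, List.map_nil]
    rw [List.nodup_append]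
    refine ⟨(keyNodup.sublist (List.Sublist.map Prod.fst List.filter_sublist)), List.nodup_singleton _, ?_⟩
    intro r hr
    rw [List.mem_map] at hr
    obtain ⟨e, he, hre⟩ := hr
    have := (hkept e he).2.2
    simp only [List.mem_singleton]
    omega
  · intro e he
    rw [hres1, hres2]
    rcases List.mem_append.mp he with h | h
    · obtain ⟨heL, hner1, hlek⟩ := hkept e h
      obtain ⟨h1, h2, h3, h4⟩ := entries e heL
      refine ⟨by rw [hklen]; omega, ?_, ?_, fun q hq => List.mem_append_left _ (h4 q hq)⟩
      · rw [hfix' e.1]; exact ⟨h2, hner1⟩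
      · rw [hSz e.1, if_neg hner1, if_neg (by omega)]; exact h3
    · rw [List.mem_singleton] at h
      subst h
      refine ⟨by rw [hklen]; omega, hparK', ?_, ?_⟩
      · rw [hSz k, if_neg hkr1, if_pos rfl]
        simp only [List.length_cons]
        push_cast; ring
      · intro q hq
        rcases List.mem_cons.mp hq with h | h
        · subst h; exact List.mem_append_right _ (List.mem_singleton.mpr rfl)
        · exact List.mem_append_left _ (hmem1 q h)
  · intro j hj hfj
    rw [hklen] at hj
    rw [hres1] at hfj
    rw [hfix' j] at hfj
    rcases Nat.lt_succ_iff_lt_or_eq.mp hj with h | h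
    · obtain ⟨e, he, hej⟩ := rootsIn j h hfj.1
      have heT : pvTouch (a, b) e.2 = false := by
        by_cases ht : pvTouch (a, b) e.2 = true
        · exfalso
          have h9 := hall e he ht
          rw [h9] at hej
          exact hfj.2 hej.symm
        · exact Bool.eq_false_iff.mpr ht
      refine ⟨e, List.mem_append_left _ (List.mem_filter.mpr ⟨he, by rw [heT]; rfl⟩), hej⟩
    · subst h
      exact ⟨(k, (a, b) :: e1.2), List.mem_append_right _ (List.mem_singleton.mpr rfl), rfl⟩
  · intro j hj hne
    rw [hklen] at hj
    rw [hres2]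
    have hjk : j ≠ k := by
      intro he
      exact hne (k, (a, b) :: e1.2) (List.mem_append_right _ (List.mem_singleton.mpr rfl)) (by rw [he])
    by_cases hjr1 : j = e1.1
    · rw [hSz j, if_pos hjr1]
    · rw [hSz j, if_neg hjr1, if_neg hjk]
      apply nonRoot j (by omega)
      intro e he hej
      by_cases ht : pvTouch (a, b) e.2 = true
      · have := hall e he ht
        rw [this] at hej
        exact hjr1 hej.symm
      · exact hne e (List.mem_append_left _
          (List.mem_filter.mpr ⟨he, by rw [Bool.eq_false_iff.mpr ht]; rfl⟩)) hej
  · intro x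
    rw [PySem.Dict.get?_insert]
    by_cases hxa : x = a
    · subst hxa
      rw [if_pos rfl]
      constructor
      · intro _
        exact ⟨(x, b), List.mem_append_right _ (List.mem_singleton.mpr rfl), rfl⟩
      · intro _; rfl
    · rw [if_neg hxa, rxSome x]
      constructor
      · rintro ⟨q, hq, hqx⟩; exact ⟨q, List.mem_append_left _ hq, hqx⟩
      · rintro ⟨q, hq, hqx⟩
        rcases List.mem_append.mp hq with h | h
        · exact ⟨q, h, hqx⟩
        · rw [List.mem_singleton] at h
          subst h
          exact absurd hqx.symm hxa
  · intro x w hw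
    rw [hres1]
    rw [PySem.Dict.get?_insert] at hw
    by_cases hxa : x = a
    · rw [if_pos hxa] at hw
      have hvk2 : w = (k : Int) := by injection hw with h1; exact h1.symm
      subst hvk2
      refine ⟨Int.natCast_nonneg k, by rw [hklen]; push_cast; omega,
        (k, (a, b) :: e1.2), List.mem_append_right _ (List.mem_singleton.mpr rfl),
        ⟨(a, b), List.mem_cons_self, by rw [hxa]⟩, ?_⟩
      simp only [Int.toNat_natCast]
      exact pvRoot_fix hparK'
    · rw [if_neg hxa] at hw
      obtain ⟨h1, h2, e, he, ⟨q, hq, hqx⟩, hr⟩ := rxVal x w hw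
      have hwn : w.toNat < uf.length := by rw [ufLen]; omega
      refine ⟨h1, by rw [hklen]; push_cast at h2 ⊢; omega, ?_⟩
      by_cases ht : pvTouch (a, b) e.2 = true
      · have hee1 : e = e1 := hall e he ht
        refine ⟨(k, (a, b) :: e1.2), List.mem_append_right _ (List.mem_singleton.mpr rfl),
          ⟨q, List.mem_cons_of_mem _ (hee1 ▸ hq), hqx⟩, ?_⟩
        rw [hroots' w.toNat hwn, hr, hee1]
        rw [if_pos rfl]
      · have hkm : e ∈ L.filter (fun e => !pvTouch (a, b) e.2) :=
          List.mem_filter.mpr ⟨he, by rw [Bool.eq_false_iff.mpr ht]; rfl⟩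
        obtain ⟨-, hner1, -⟩ := hkept e hkm
        refine ⟨e, List.mem_append_left _ hkm, ⟨q, hq, hqx⟩, ?_⟩
        rw [hroots' w.toNat hwn, hr, if_neg hner1]
  · intro y
    rw [PySem.Dict.get?_insert]
    by_cases hyb : y = b
    · subst hyb
      rw [if_pos rfl]
      constructor
      · intro _
        exact ⟨(a, y), List.mem_append_right _ (List.mem_singleton.mpr rfl), rfl⟩
      · intro _; rfl
    · rw [if_neg hyb, rySome y]
      constructor
      · rintro ⟨q, hq, hqy⟩; exact ⟨q, List.mem_append_left _ hq, hqy⟩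
      · rintro ⟨q, hq, hqy⟩
        rcases List.mem_append.mp hq with h | h
        · exact ⟨q, h, hqy⟩
        · rw [List.mem_singleton] at h
          subst h
          exact absurd hqy.symm hyb
  · intro y w hw
    rw [hres1]
    rw [PySem.Dict.get?_insert] at hw
    by_cases hyb : y = b
    · rw [if_pos hyb] at hw
      have hvk2 : w = (k : Int) := by injection hw with h1; exact h1.symm
      subst hvk2
      refine ⟨Int.natCast_nonneg k, by rw [hklen]; push_cast; omega,
        (k, (a, b) :: e1.2), List.mem_append_right _ (List.mem_singleton.mpr rfl),
        ⟨(a, b), List.mem_cons_self, by rw [hyb]⟩, ?_⟩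
      simp only [Int.toNat_natCast]
      exact pvRoot_fix hparK'
    · rw [if_neg hyb] at hw
      obtain ⟨h1, h2, e, he, ⟨q, hq, hqy⟩, hr⟩ := ryVal y w hw
      have hwn : w.toNat < uf.length := by rw [ufLen]; omega
      refine ⟨h1, by rw [hklen]; push_cast at h2 ⊢; omega, ?_⟩
      by_cases ht : pvTouch (a, b) e.2 = true
      · have hee1 : e = e1 := hall e he ht
        refine ⟨(k, (a, b) :: e1.2), List.mem_append_right _ (List.mem_singleton.mpr rfl),
          ⟨q, List.mem_cons_of_mem _ (hee1 ▸ hq), hqy⟩, ?_⟩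
        rw [hroots' w.toNat hwn, hr, hee1]
        rw [if_pos rfl]
      · have hkm : e ∈ L.filter (fun e => !pvTouch (a, b) e.2) :=
          List.mem_filter.mpr ⟨he, by rw [Bool.eq_false_iff.mpr ht]; rfl⟩
        obtain ⟨-, hner1, -⟩ := hkept e hkm
        refine ⟨e, List.mem_append_left _ hkm, ⟨q, hq, hqy⟩, ?_⟩
        rw [hroots' w.toNat hwn, hr, if_neg hner1]

lemma pvStep_some_some (n : Nat) (pre : List (Int × Int)) (a b : Int)
    (uf size : List Int) (rx ry : PySem.Dict Int Int) (L : List (Nat × List (Int × Int)))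
    (hinv : pvInvL n pre uf size rx ry L) (hlt : pre.length < n)
    (hbad : pvBadStep (pvGroups pre) (a, b) = false)
    (v w : Int) (hx : rx.get? a = some v) (hy : ry.get? b = some w) :
    ∃ L', pvInvL n (pre ++ [(a, b)])
      (pvUnionA (pvUnionA uf size ((pre.length : Nat) : Int) v).1
        (pvUnionA uf size ((pre.length : Nat) : Int) v).2 ((pre.length : Nat) : Int) w).1
      (pvUnionA (pvUnionA uf size ((pre.length : Nat) : Int) v).1
        (pvUnionA uf size ((pre.length : Nat) : Int) v).2 ((pre.length : Nat) : Int) w).2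
      (rx.insert a (pre.length : Int)) (ry.insert b (pre.length : Int)) L' := by
  obtain ⟨ufLen, szLen, kLe, tailUf, tailSz, mono, closed, grpEq, keyNodup, entries,
    rootsIn, nonRoot, rxSome, rxVal, rySome, ryVal⟩ := hinv
  set k := pre.length with hk
  have hklen : (pre ++ [(a, b)]).length = k + 1 := by simp [hk]
  have hparK : pvParN uf k = k := by
    unfold pvParN; rw [tailUf k le_rfl hlt]; simp
  obtain ⟨h0v, hvk, e1, he1, ⟨q1, hq1, hq1a⟩, hroot1⟩ := rxVal a v hx
  obtain ⟨h0w, hwk, e2, he2, ⟨q2, hq2, hq2b⟩, hroot2⟩ := ryVal b w hy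
  obtain ⟨jx, rfl⟩ : ∃ jx : Nat, v = (jx : Int) := ⟨v.toNat, (Int.toNat_of_nonneg h0v).symm⟩
  obtain ⟨jy, rfl⟩ : ∃ jy : Nat, w = (jy : Int) := ⟨w.toNat, (Int.toNat_of_nonneg h0w).symm⟩
  rw [Int.toNat_natCast] at hroot1 hroot2
  have hjxk : jx < k := by exact_mod_cast hvk
  have hjyk : jy < k := by exact_mod_cast hwk
  obtain ⟨hr1k, hfixr1, hsz1, hmem1⟩ := entries e1 he1
  obtain ⟨hr2k, hfixr2, hsz2, hmem2⟩ := entries e2 he2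
  have hLnodup : L.Nodup := keyNodup.of_map
  have hLpw : L.Pairwise (fun e f => pvDisj e.2 f.2) := by
    have h1 := pvGroups_pairwise pre
    rw [grpEq, List.pairwise_map] at h1
    exact h1
  have hbadL : ∀ e ∈ L, (∃ q ∈ e.2, q.1 = a) → (∃ q ∈ e.2, q.2 = b) → False := by
    intro e he ⟨qx, hqx, hqxa⟩ ⟨qy, hqy, hqyb⟩
    rw [grpEq] at hbad
    unfold pvBadStep at hbad
    rw [List.any_eq_false] at hbad
    have h2 := hbad e.2 (List.mem_map_of_mem he)
    have hA : (e.2.any fun q => q.1 == a) = true :=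
      List.any_eq_true.mpr ⟨qx, hqx, beq_iff_eq.mpr hqxa⟩
    have hB : (e.2.any fun q => q.2 == b) = true :=
      List.any_eq_true.mpr ⟨qy, hqy, beq_iff_eq.mpr hqyb⟩
    rw [hA, hB] at h2
    simp at h2
  have he12 : e1 ≠ e2 := by
    intro he
    exact hbadL e1 he1 ⟨q1, hq1, hq1a⟩ ⟨q2, he ▸ hq2, hq2b⟩
  have hr12 : e1.1 ≠ e2.1 := by
    intro he
    exact he12 (pvNodupKey keyNodup he1 he2 he)
  have he1T : pvTouch (a, b) e1.2 = true :=
    (pvTouch_iff _ _).mpr ⟨q1, hq1, Or.inl hq1a⟩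
  have he2T : pvTouch (a, b) e2.2 = true :=
    (pvTouch_iff _ _).mpr ⟨q2, hq2, Or.inr hq2b⟩
  have hall : ∀ e ∈ L, pvTouch (a, b) e.2 = true → e = e1 ∨ e = e2 := by
    intro e he ht
    obtain ⟨q, hq, hqab⟩ := (pvTouch_iff _ _).mp ht
    rcases hqab with hqa | hqb
    · left
      by_cases hee : e = e1
      · exact hee
      · have hd := List.Pairwise.forall (fun e f h q hq r hr =>
          ⟨(h r hr q hq).1.symm, (h r hr q hq).2.symm⟩) hLpw he he1 hee
        exact absurd (hqa.trans hq1a.symm) (hd q hq q1 hq1).1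
    · right
      by_cases hee : e = e2
      · exact hee
      · have hd := List.Pairwise.forall (fun e f h q hq r hr =>
          ⟨(h r hr q hq).1.symm, (h r hr q hq).2.symm⟩) hLpw he he2 hee
        exact absurd (hqb.trans hq2b.symm) (hd q hq q2 hq2).2
  have hperm : (L.filter (fun e => pvTouch (a, b) e.2)).Perm [e1, e2] := by
    apply pvPairOf _ (hLnodup.filter _) e1 e2 he12
      (List.mem_filter.mpr ⟨he1, he1T⟩) (List.mem_filter.mpr ⟨he2, he2T⟩)
    intro z hz
    rw [List.mem_filter] at hz
    exact hall z hz.1 hz.2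
  have hkept : ∀ e ∈ L.filter (fun e => !pvTouch (a, b) e.2),
      e ∈ L ∧ e.1 ≠ e1.1 ∧ e.1 ≠ e2.1 ∧ e.1 < k := by
    intro e he
    rw [List.mem_filter] at he
    refine ⟨he.1, ?_, ?_, (entries e he.1).1⟩
    · intro hee
      have h9 : e = e1 := pvNodupKey keyNodup he.1 he1 hee
      rw [h9, he1T] at he
      simp at he
    · intro hee
      have h9 : e = e2 := pvNodupKey keyNodup he.1 he2 hee
      rw [h9, he2T] at he
      simp at he
  -- first union
  have hjxn : jx < uf.length := by rw [ufLen]; omega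
  have hjyn : jy < uf.length := by rw [ufLen]; omega
  have hkn : k < uf.length := by rw [ufLen]; omega
  obtain ⟨uf1, hufeq1, hlen1, hmono1, hroots1, hfix1, habove1, hclo1⟩ :=
    pvUnionA_spec uf size k jx mono hkn hjxn hparK (by rw [hroot1]; omega)
  rw [hroot1] at hufeq1 hroots1 hfix1 habove1
  set size1 := PySem.List.pySetD (PySem.List.pySetD size (k : Int)
      (PySem.List.pyGetD size (k : Int) 0 + PySem.List.pyGetD size ((e1.1 : Nat) : Int) 0))
      ((e1.1 : Nat) : Int) 0 with hsize1
  have hr1n : e1.1 < size.length := by rw [szLen]; omega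
  have hr2n : e2.1 < size.length := by rw [szLen]; omega
  have hkn2 : k < size.length := by rw [szLen]; omega
  have hSz1 : ∀ m : Nat, PySem.List.pyGetD size1 (m : Int) 0 =
      if m = e1.1 then 0 else if m = k then 1 + (e1.2.length : Int)
      else PySem.List.pyGetD size (m : Int) 0 := by
    intro m
    rw [hsize1, pvSet_entry _ e1.1 (by rw [pvSet_len]; exact hr1n) _ m]
    by_cases h1 : m = e1.1
    · rw [if_pos h1, if_pos h1]
    · rw [if_neg h1, if_neg h1, pvSet_entry _ k hkn2 _ m]
      by_cases h2 : m = k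
      · rw [if_pos h2, if_pos h2, tailSz k le_rfl hlt, hsz1]
      · rw [if_neg h2, if_neg h2]
  have hszlen1 : size1.length = size.length := by rw [hsize1, pvSet_len, pvSet_len]
  -- second union
  have hparK1 : pvParN uf1 k = k := by
    unfold pvParN; rw [habove1 k (by omega)]; exact hparK
  have hroot2' : pvRoot uf1 jy = e2.1 := by
    rw [hroots1 jy hjyn, hroot2, if_neg (fun h => hr12 h.symm)]
  obtain ⟨uf2, hufeq2, hlen2, hmono2, hroots2, hfix2, habove2, hclo2⟩ :=
    pvUnionA_spec uf1 size1 k jy hmono1 (by rw [hlen1]; exact hkn)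
      (by rw [hlen1]; exact hjyn) hparK1 (by rw [hroot2']; omega)
  rw [hroot2'] at hufeq2 hroots2 hfix2 habove2
  set size2 := PySem.List.pySetD (PySem.List.pySetD size1 (k : Int)
      (PySem.List.pyGetD size1 (k : Int) 0 + PySem.List.pyGetD size1 ((e2.1 : Nat) : Int) 0))
      ((e2.1 : Nat) : Int) 0 with hsize2
  have hres1a : (pvUnionA uf size ((k : Nat) : Int) ((jx : Nat) : Int)).1 = uf1 := by rw [hufeq1]
  have hres1b : (pvUnionA uf size ((k : Nat) : Int) ((jx : Nat) : Int)).2 = size1 := by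
    rw [hufeq1]
  have hres2a : (pvUnionA uf1 size1 ((k : Nat) : Int) ((jy : Nat) : Int)).1 = uf2 := by rw [hufeq2]
  have hres2b : (pvUnionA uf1 size1 ((k : Nat) : Int) ((jy : Nat) : Int)).2 = size2 := by
    rw [hufeq2]
  have hszlen2 : size2.length = n := by
    rw [hsize2, pvSet_len, pvSet_len, hszlen1, szLen]
  have hkr1 : k ≠ e1.1 := by omega
  have hkr2 : k ≠ e2.1 := by omega
  have hSz : ∀ m : Nat, PySem.List.pyGetD size2 (m : Int) 0 =
      if m = e2.1 then 0 else if m = e1.1 then 0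
      else if m = k then 1 + (e1.2.length : Int) + (e2.2.length : Int)
      else PySem.List.pyGetD size (m : Int) 0 := by
    intro m
    rw [hsize2, pvSet_entry _ e2.1 (by rw [pvSet_len, hszlen1]; exact hr2n) _ m]
    by_cases h1 : m = e2.1
    · rw [if_pos h1, if_pos h1]
    · rw [if_neg h1, if_neg h1, pvSet_entry _ k (by rw [hszlen1]; exact hkn2) _ m]
      by_cases h2 : m = k
      · rw [if_pos h2, if_pos h2, if_neg (by omega), hSz1 k, if_neg hkr1,
          if_pos rfl, hSz1 e2.1, if_neg (fun h => hr12 h.symm), if_neg (Ne.symm hkr2), hsz2]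
      · rw [if_neg h2, if_neg h2, hSz1 m]
        by_cases h3 : m = e1.1
        · rw [if_pos h3, if_pos h3]
        · rw [if_neg h3, if_neg h3, if_neg h2]
  have hroots : ∀ m, m < uf.length → pvRoot uf2 m =
      if pvRoot uf m = e1.1 ∨ pvRoot uf m = e2.1 then k else pvRoot uf m := by
    intro m hm
    rw [hroots2 m (by rw [hlen1]; exact hm), hroots1 m hm]
    by_cases h1 : pvRoot uf m = e1.1
    · rw [if_pos h1, if_neg (by omega : ¬ k = e2.1), if_pos (Or.inl h1)]
    · rw [if_neg h1]
      by_cases h2 : pvRoot uf m = e2.1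
      · rw [if_pos h2, if_pos (Or.inr h2)]
      · rw [if_neg h2, if_neg (not_or.mpr ⟨h1, h2⟩)]
  have hfix : ∀ m, pvParN uf2 m = m ↔ (pvParN uf m = m ∧ m ≠ e1.1 ∧ m ≠ e2.1) := by
    intro m
    rw [hfix2 m, hfix1 m]
    tauto
  have habove : ∀ m : Nat, e1.1 < m → e2.1 < m →
      PySem.List.pyGetD uf2 (m : Int) 0 = PySem.List.pyGetD uf (m : Int) 0 := by
    intro m h1 h2
    rw [habove2 m h2, habove1 m h1]
  have hparK2 : pvParN uf2 k = k := by
    unfold pvParN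
    rw [habove k (by omega) (by omega)]
    exact hparK
  set gNew := (a, b) :: ((L.filter (fun e => pvTouch (a, b) e.2)).map Prod.snd).flatten with hgNew
  have hpermSnd := hperm.map Prod.snd
  have hlenNat : gNew.length = e1.2.length + e2.2.length + 1 := by
    rw [hgNew]
    simp only [List.length_cons, List.length_flatten]
    have h10 := ((hpermSnd).map List.length).sum_eq
    rw [h10]
    simp only [List.map_cons, List.map_nil, List.sum_cons, List.sum_nil]
    omega
  have hmemNew : ∀ q, q ∈ gNew ↔ q = (a, b) ∨ (q ∈ e1.2 ∨ q ∈ e2.2) := by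
    intro q
    rw [hgNew, List.mem_cons]
    apply or_congr Iff.rfl
    rw [List.mem_flatten]
    constructor
    · rintro ⟨g, hg, hqg⟩
      have h9 : g = e1.2 ∨ g = e2.2 := by simpa using (hpermSnd).mem_iff.mp hg
      rcases h9 with h | h
      · exact Or.inl (h ▸ hqg)
      · exact Or.inr (h ▸ hqg)
    · rintro (h | h)
      · exact ⟨e1.2, (hpermSnd).mem_iff.mpr (by simp), h⟩
      · exact ⟨e2.2, (hpermSnd).mem_iff.mpr (by simp), h⟩
  refine ⟨L.filter (fun e => !pvTouch (a, b) e.2) ++ [(k, gNew)],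
    ?_, ?_, ?_, ?_, ?_, ?_, ?_, ?_, ?_, ?_, ?_, ?_, ?_, ?_, ?_, ?_⟩
  · rw [hres1a, hres1b, hres2a, hlen2, hlen1, ufLen]
  · rw [hres1a, hres1b, hres2b]; exact hszlen2
  · rw [hklen]; omega
  · intro j hj1 hj2
    rw [hres1a, hres1b, hres2a]
    rw [hklen] at hj1
    rw [habove j (by omega) (by omega)]
    exact tailUf j (by omega) hj2
  · intro j hj1 hj2
    rw [hres1a, hres1b, hres2b]
    rw [hklen] at hj1
    rw [hSz j, if_neg (by omega), if_neg (by omega), if_neg (by omega)]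
    exact tailSz j (by omega) hj2
  · rw [hres1a, hres1b, hres2a]; exact hmono2
  · intro j hj
    rw [hres1a, hres1b, hres2a]
    rw [hklen] at hj
    have hjn : j < uf.length := by rw [ufLen]; omega
    rcases hclo2 j (by rw [hlen1]; exact hjn) with h | h
    · have hp2 : pvParN uf2 j = pvParN uf1 j := by unfold pvParN; rw [h]
      rcases hclo1 j hjn with h1 | h1
      · have hp1 : pvParN uf1 j = pvParN uf j := by unfold pvParN; rw [h1]
        rw [hp2, hp1]
        rcases Nat.lt_succ_iff_lt_or_eq.mp hj with h2 | h2
        · have := closed j h2; omega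
        · subst h2; rw [hparK]; omega
      · rw [hp2]; omega
    · omega
  · rw [pvGroups_concat, grpEq, pvGStep_map]
    rw [List.map_append]
    rfl
  · rw [List.map_append]
    simp only [List.map_cons, List.map_nil]
    rw [List.nodup_append]
    refine ⟨(keyNodup.sublist (List.Sublist.map Prod.fst List.filter_sublist)), List.nodup_singleton _, ?_⟩
    intro r hr
    rw [List.mem_map] at hr
    obtain ⟨e, he, hre⟩ := hr
    have := (hkept e he).2.2.2
    simp only [List.mem_singleton]
    omega
  · intro e he
    rw [hres1a, hres1b, hres2a, hres2b]
    rcases List.mem_append.mp he with h | h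
    · obtain ⟨heL, hne1, hne2, hlek⟩ := hkept e h
      obtain ⟨h1, h2, h3, h4⟩ := entries e heL
      refine ⟨by rw [hklen]; omega, ?_, ?_, fun q hq => List.mem_append_left _ (h4 q hq)⟩
      · rw [hfix e.1]; exact ⟨h2, hne1, hne2⟩
      · rw [hSz e.1, if_neg hne2, if_neg hne1, if_neg (by omega)]; exact h3
    · rw [List.mem_singleton] at h
      subst h
      refine ⟨by rw [hklen]; omega, hparK2, ?_, ?_⟩
      · rw [hSz k, if_neg hkr2, if_neg hkr1, if_pos rfl]
        rw [hlenNat]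
        push_cast; ring
      · intro q hq
        rcases (hmemNew q).mp hq with h | h | h
        · subst h; exact List.mem_append_right _ (List.mem_singleton.mpr rfl)
        · exact List.mem_append_left _ (hmem1 q h)
        · exact List.mem_append_left _ (hmem2 q h)
  · intro j hj hfj
    rw [hklen] at hj
    rw [hres1a, hres1b, hres2a] at hfj
    rw [hfix j] at hfj
    rcases Nat.lt_succ_iff_lt_or_eq.mp hj with h | h
    · obtain ⟨e, he, hej⟩ := rootsIn j h hfj.1
      have heT : pvTouch (a, b) e.2 = false := by
        by_cases ht : pvTouch (a, b) e.2 = true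
        · exfalso
          rcases hall e he ht with h9 | h9
          · rw [h9] at hej; exact hfj.2.1 hej.symm
          · rw [h9] at hej; exact hfj.2.2 hej.symm
        · exact Bool.eq_false_iff.mpr ht
      refine ⟨e, List.mem_append_left _ (List.mem_filter.mpr ⟨he, by rw [heT]; rfl⟩), hej⟩
    · subst h
      exact ⟨(k, gNew), List.mem_append_right _ (List.mem_singleton.mpr rfl), rfl⟩
  · intro j hj hne
    rw [hklen] at hj
    rw [hres1a, hres1b, hres2b]
    have hjk : j ≠ k := by
      intro he
      exact hne (k, gNew) (List.mem_append_right _ (List.mem_singleton.mpr rfl)) (by rw [he])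
    by_cases hjr2 : j = e2.1
    · rw [hSz j, if_pos hjr2]
    · by_cases hjr1 : j = e1.1
      · rw [hSz j, if_neg hjr2, if_pos hjr1]
      · rw [hSz j, if_neg hjr2, if_neg hjr1, if_neg hjk]
        apply nonRoot j (by omega)
        intro e he hej
        by_cases ht : pvTouch (a, b) e.2 = true
        · rcases hall e he ht with h9 | h9
          · rw [h9] at hej; exact hjr1 hej.symm
          · rw [h9] at hej; exact hjr2 hej.symm
        · exact hne e (List.mem_append_left _
            (List.mem_filter.mpr ⟨he, by rw [Bool.eq_false_iff.mpr ht]; rfl⟩)) hej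
  · intro x
    rw [PySem.Dict.get?_insert]
    by_cases hxa : x = a
    · subst hxa
      rw [if_pos rfl]
      constructor
      · intro _
        exact ⟨(x, b), List.mem_append_right _ (List.mem_singleton.mpr rfl), rfl⟩
      · intro _; rfl
    · rw [if_neg hxa, rxSome x]
      constructor
      · rintro ⟨q, hq, hqx⟩; exact ⟨q, List.mem_append_left _ hq, hqx⟩
      · rintro ⟨q, hq, hqx⟩
        rcases List.mem_append.mp hq with h | h
        · exact ⟨q, h, hqx⟩
        · rw [List.mem_singleton] at h
          subst h
          exact absurd hqx.symm hxa
  · intro x u hu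
    rw [hres1a, hres1b, hres2a]
    rw [PySem.Dict.get?_insert] at hu
    by_cases hxa : x = a
    · rw [if_pos hxa] at hu
      have hvk2 : u = (k : Int) := by injection hu with h1; exact h1.symm
      subst hvk2
      refine ⟨Int.natCast_nonneg k, by rw [hklen]; push_cast; omega,
        (k, gNew), List.mem_append_right _ (List.mem_singleton.mpr rfl),
        ⟨(a, b), (hmemNew (a, b)).mpr (Or.inl rfl), by rw [hxa]⟩, ?_⟩
      simp only [Int.toNat_natCast]
      exact pvRoot_fix hparK2
    · rw [if_neg hxa] at hu
      obtain ⟨h1, h2, e, he, ⟨q, hq, hqx⟩, hr⟩ := rxVal x u hu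
      have hwn : u.toNat < uf.length := by rw [ufLen]; omega
      refine ⟨h1, by rw [hklen]; push_cast at h2 ⊢; omega, ?_⟩
      by_cases ht : pvTouch (a, b) e.2 = true
      · rcases hall e he ht with h9 | h9
        · refine ⟨(k, gNew), List.mem_append_right _ (List.mem_singleton.mpr rfl),
            ⟨q, (hmemNew q).mpr (Or.inr (Or.inl (h9 ▸ hq))), hqx⟩, ?_⟩
          rw [hroots u.toNat hwn, hr, h9, if_pos (Or.inl rfl)]
        · refine ⟨(k, gNew), List.mem_append_right _ (List.mem_singleton.mpr rfl),
            ⟨q, (hmemNew q).mpr (Or.inr (Or.inr (h9 ▸ hq))), hqx⟩, ?_⟩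
          rw [hroots u.toNat hwn, hr, h9, if_pos (Or.inr rfl)]
      · have hkm : e ∈ L.filter (fun e => !pvTouch (a, b) e.2) :=
          List.mem_filter.mpr ⟨he, by rw [Bool.eq_false_iff.mpr ht]; rfl⟩
        obtain ⟨-, hne1, hne2, -⟩ := hkept e hkm
        refine ⟨e, List.mem_append_left _ hkm, ⟨q, hq, hqx⟩, ?_⟩
        rw [hroots u.toNat hwn, hr, if_neg (not_or.mpr ⟨hne1, hne2⟩)]
  · intro y
    rw [PySem.Dict.get?_insert]
    by_cases hyb : y = b
    · subst hyb
      rw [if_pos rfl]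
      constructor
      · intro _
        exact ⟨(a, y), List.mem_append_right _ (List.mem_singleton.mpr rfl), rfl⟩
      · intro _; rfl
    · rw [if_neg hyb, rySome y]
      constructor
      · rintro ⟨q, hq, hqy⟩; exact ⟨q, List.mem_append_left _ hq, hqy⟩
      · rintro ⟨q, hq, hqy⟩
        rcases List.mem_append.mp hq with h | h
        · exact ⟨q, h, hqy⟩
        · rw [List.mem_singleton] at h
          subst h
          exact absurd hqy.symm hyb
  · intro y u hu
    rw [hres1a, hres1b, hres2a]
    rw [PySem.Dict.get?_insert] at hu
    by_cases hyb : y = b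
    · rw [if_pos hyb] at hu
      have hvk2 : u = (k : Int) := by injection hu with h1; exact h1.symm
      subst hvk2
      refine ⟨Int.natCast_nonneg k, by rw [hklen]; push_cast; omega,
        (k, gNew), List.mem_append_right _ (List.mem_singleton.mpr rfl),
        ⟨(a, b), (hmemNew (a, b)).mpr (Or.inl rfl), by rw [hyb]⟩, ?_⟩
      simp only [Int.toNat_natCast]
      exact pvRoot_fix hparK2
    · rw [if_neg hyb] at hu
      obtain ⟨h1, h2, e, he, ⟨q, hq, hqy⟩, hr⟩ := ryVal y u hu
      have hwn : u.toNat < uf.length := by rw [ufLen]; omega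
      refine ⟨h1, by rw [hklen]; push_cast at h2 ⊢; omega, ?_⟩
      by_cases ht : pvTouch (a, b) e.2 = true
      · rcases hall e he ht with h9 | h9
        · refine ⟨(k, gNew), List.mem_append_right _ (List.mem_singleton.mpr rfl),
            ⟨q, (hmemNew q).mpr (Or.inr (Or.inl (h9 ▸ hq))), hqy⟩, ?_⟩
          rw [hroots u.toNat hwn, hr, h9, if_pos (Or.inl rfl)]
        · refine ⟨(k, gNew), List.mem_append_right _ (List.mem_singleton.mpr rfl),
            ⟨q, (hmemNew q).mpr (Or.inr (Or.inr (h9 ▸ hq))), hqy⟩, ?_⟩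
          rw [hroots u.toNat hwn, hr, h9, if_pos (Or.inr rfl)]
      · have hkm : e ∈ L.filter (fun e => !pvTouch (a, b) e.2) :=
          List.mem_filter.mpr ⟨he, by rw [Bool.eq_false_iff.mpr ht]; rfl⟩
        obtain ⟨-, hne1, hne2, -⟩ := hkept e hkm
        refine ⟨e, List.mem_append_left _ hkm, ⟨q, hq, hqy⟩, ?_⟩
        rw [hroots u.toNat hwn, hr, if_neg (not_or.mpr ⟨hne1, hne2⟩)]

-- ---------- driver: A's main loop preserves the invariant ----------

lemma pvLen2 (p : List Int) (hp : p.length = 2) : ∃ a b : Int, p = [a, b] := by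
  match p, hp with
  | [a, b], _ => exact ⟨a, b, rfl⟩

lemma pvBadFold_true : ∀ (l : List (Int × Int)) (gs : List (List (Int × Int))),
    ((l.foldl (fun st p => (pvGStep st.1 p, st.2 || pvBadStep st.1 p)) (gs, true)).2) = true := by
  intro l
  induction l with
  | nil => intro gs; rfl
  | cons p t ih => intro gs; simpa using ih (pvGStep gs p)

theorem pvLoopA : ∀ (sufp : List (List Int)) (pre : List (Int × Int)) (uf size : List Int)
    (rx ry : PySem.Dict Int Int) (L : List (Nat × List (Int × Int))) (n : Nat),
    pvInvL n pre uf size rx ry L →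
    pre.length + sufp.length = n →
    (∀ p ∈ sufp, p.length = 2) →
    ((sufp.map pvPair).foldl (fun st p => (pvGStep st.1 p, st.2 || pvBadStep st.1 p))
      (pvGroups pre, false)).2 = false →
    ∃ L', pvInvL n (pre ++ sufp.map pvPair)
      ((PySem.List.enumerate sufp (pre.length : Int)).foldl pvStepA (uf, size, rx, ry)).1
      ((PySem.List.enumerate sufp (pre.length : Int)).foldl pvStepA (uf, size, rx, ry)).2.1
      ((PySem.List.enumerate sufp (pre.length : Int)).foldl pvStepA (uf, size, rx, ry)).2.2.1
      ((PySem.List.enumerate sufp (pre.length : Int)).foldl pvStepA (uf, size, rx, ry)).2.2.2 L' := by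
  intro sufp
  induction sufp with
  | nil =>
    intro pre uf size rx ry L n hinv hlen hp hbad
    simp only [List.map_nil, List.append_nil, PySem.List.enumerate, List.foldl_nil]
    exact ⟨L, hinv⟩
  | cons p t ih =>
    intro pre uf size rx ry L n hinv hlen hp hbad
    obtain ⟨a, b, rfl⟩ := pvLen2 p (hp p List.mem_cons_self)
    set k := pre.length with hk
    have hklt : k < n := by simp at hlen; omega
    rw [List.map_cons, List.foldl_cons] at hbad
    have hbadstep : pvBadStep (pvGroups pre) (pvPair [a, b]) = false := by
      by_cases hbs : pvBadStep (pvGroups pre) (pvPair [a, b]) = true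
      · rw [hbs] at hbad
        rw [Bool.false_or] at hbad
        rw [pvBadFold_true] at hbad
        exact absurd hbad (by simp)
      · exact Bool.eq_false_iff.mpr hbs
    rw [hbadstep, Bool.or_false] at hbad
    have hpair : pvPair [a, b] = (a, b) := rfl
    rw [hpair] at hbadstep hbad
    -- one step
    have hstep : ∃ L', pvInvL n (pre ++ [(a, b)])
        (pvStepA (uf, size, rx, ry) ((k : Int), [a, b])).1
        (pvStepA (uf, size, rx, ry) ((k : Int), [a, b])).2.1
        (pvStepA (uf, size, rx, ry) ((k : Int), [a, b])).2.2.1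
        (pvStepA (uf, size, rx, ry) ((k : Int), [a, b])).2.2.2 L' := by
      rcases hx : rx.get? a with _ | v <;> rcases hy : ry.get? b with _ | w
      · have hred : pvStepA (uf, size, rx, ry) ((k : Int), [a, b]) =
            (uf, size, rx.insert a (k : Int), ry.insert b (k : Int)) := by
          simp [pvStepA, hx, hy]
        rw [hred]
        exact pvStep_none_none n pre a b uf size rx ry L
          ⟨hinv.1, hinv.2, hinv.3, hinv.4, hinv.5, hinv.6, hinv.7, hinv.8, hinv.9, hinv.10,
            hinv.11, hinv.12, hinv.13, hinv.14, hinv.15, hinv.16⟩ hklt hx hy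
      · have hred : pvStepA (uf, size, rx, ry) ((k : Int), [a, b]) =
            ((pvUnionA uf size ((k : Nat) : Int) w).1, (pvUnionA uf size ((k : Nat) : Int) w).2,
              rx.insert a (k : Int), ry.insert b (k : Int)) := by
          simp [pvStepA, hx, hy]
        rw [hred]
        exact pvStep_none_some n pre a b uf size rx ry L
          ⟨hinv.1, hinv.2, hinv.3, hinv.4, hinv.5, hinv.6, hinv.7, hinv.8, hinv.9, hinv.10,
            hinv.11, hinv.12, hinv.13, hinv.14, hinv.15, hinv.16⟩ hklt w hx hy
      · have hred : pvStepA (uf, size, rx, ry) ((k : Int), [a, b]) =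
            ((pvUnionA uf size ((k : Nat) : Int) v).1, (pvUnionA uf size ((k : Nat) : Int) v).2,
              rx.insert a (k : Int), ry.insert b (k : Int)) := by
          simp [pvStepA, hx, hy]
        rw [hred]
        exact pvStep_some_none n pre a b uf size rx ry L
          ⟨hinv.1, hinv.2, hinv.3, hinv.4, hinv.5, hinv.6, hinv.7, hinv.8, hinv.9, hinv.10,
            hinv.11, hinv.12, hinv.13, hinv.14, hinv.15, hinv.16⟩ hklt v hx hy
      · have hred : pvStepA (uf, size, rx, ry) ((k : Int), [a, b]) =
            ((pvUnionA (pvUnionA uf size ((k : Nat) : Int) v).1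
                (pvUnionA uf size ((k : Nat) : Int) v).2 ((k : Nat) : Int) w).1,
              (pvUnionA (pvUnionA uf size ((k : Nat) : Int) v).1
                (pvUnionA uf size ((k : Nat) : Int) v).2 ((k : Nat) : Int) w).2,
              rx.insert a (k : Int), ry.insert b (k : Int)) := by
          simp [pvStepA, hx, hy]
        rw [hred]
        exact pvStep_some_some n pre a b uf size rx ry L
          ⟨hinv.1, hinv.2, hinv.3, hinv.4, hinv.5, hinv.6, hinv.7, hinv.8, hinv.9, hinv.10,
            hinv.11, hinv.12, hinv.13, hinv.14, hinv.15, hinv.16⟩ hklt hbadstep v w hx hy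
    obtain ⟨L1, hinv1⟩ := hstep
    rw [PySem.List.enumerate_cons, List.foldl_cons]
    set st1 := pvStepA (uf, size, rx, ry) ((k : Int), [a, b]) with hst1
    have hlen1 : (pre ++ [(a, b)]).length + t.length = n := by simp at hlen ⊢; omega
    have hcast : ((pre ++ [(a, b)]).length : Int) = (k : Int) + 1 := by push_cast; simp [hk]
    have ht2 : ∀ q ∈ t, q.length = 2 := fun q hq => hp q (List.mem_cons_of_mem _ hq)
    have hbad1 : ((t.map pvPair).foldl (fun st p => (pvGStep st.1 p, st.2 || pvBadStep st.1 p))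
        (pvGroups (pre ++ [(a, b)]), false)).2 = false := by
      rw [pvGroups_concat]
      exact hbad
    have := ih (pre ++ [(a, b)]) st1.1 st1.2.1 st1.2.2.1 st1.2.2.2 L1 n
      (by rw [hst1]; exact hinv1) hlen1 ht2 hbad1
    rw [hcast] at this
    obtain ⟨L', hfin⟩ := this
    refine ⟨L', ?_⟩
    rw [List.map_cons, List.append_cons]
    exact hfin


-- ---------- initial state ----------

lemma pvInit (n : Nat) : pvInvL n [] (PySem.List.pyRange 0 (n : Int) 1)
    (List.replicate n 1) PySem.Dict.empty PySem.Dict.empty [] := by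
  have hlen : (PySem.List.pyRange 0 (n : Int) 1).length = n := by
    rw [PySem.List.length_pyRange_one]; simp
  have hent : ∀ j : Nat, j < n →
      PySem.List.pyGetD (PySem.List.pyRange 0 (n : Int) 1) (j : Int) 0 = (j : Int) := by
    intro j hj
    rw [PySem.List.pyGetD_natCast, List.getD_eq_getElem _ _ (by rw [hlen]; exact hj)]
    rw [PySem.List.getElem_pyRange_one]
    simp
  have hsz : ∀ j : Nat, j < n →
      PySem.List.pyGetD (List.replicate n (1 : Int)) (j : Int) 0 = 1 := by
    intro j hj
    rw [PySem.List.pyGetD_natCast, List.getD_eq_getElem _ _ (by simpa using hj)]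
    simp
  refine ⟨hlen, by simp, Nat.zero_le n, fun j _ hj => hent j hj, fun j _ hj => hsz j hj,
    ?_, by simp, rfl, List.nodup_nil, by simp, by simp, by simp, ?_, ?_, ?_, ?_⟩
  · intro j hj
    rw [hlen] at hj
    rw [hent j hj]
    constructor
    · simp
    · rw [hlen]; exact_mod_cast hj
  · intro x; simp [PySem.Dict.get?_empty]
  · intro x v hv; rw [PySem.Dict.get?_empty] at hv; cases hv
  · intro y; simp [PySem.Dict.get?_empty]
  · intro y v hv; rw [PySem.Dict.get?_empty] at hv; cases hv

-- ---------- the size array is a permutation of the component sizes plus zeros ----------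

lemma pvPermOfRoots : ∀ (rs : List Nat) (vals : List Int) (s : List Int),
    rs.Nodup → rs.length = vals.length →
    (∀ p ∈ rs.zip vals, p.1 < s.length ∧ PySem.List.pyGetD s (p.1 : Int) 0 = p.2) →
    (∀ j : Nat, j < s.length → j ∉ rs → PySem.List.pyGetD s (j : Int) 0 = 0) →
    s.Perm (vals ++ List.replicate (s.length - rs.length) 0) := by
  intro rs
  induction rs with
  | nil =>
    intro vals s _ hlen _ hz
    have hv : vals = [] := by
      cases vals with
      | nil => rfl
      | cons a t => simp at hlen
    subst hv
    simp only [List.nil_append, List.length_nil, Nat.sub_zero]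
    have heq : s = List.replicate s.length 0 := by
      apply List.ext_getElem (by simp)
      intro i h1 h2
      have := hz i h1 (List.not_mem_nil)
      rw [PySem.List.pyGetD_natCast, List.getD_eq_getElem _ _ h1] at this
      simpa using this
    rw [← heq]
  | cons r rs' ih =>
    intro vals s hnd hlen hent hz
    obtain ⟨v, vals', rfl⟩ : ∃ v vals', vals = v :: vals' := by
      cases vals with
      | nil => simp at hlen
      | cons v t => exact ⟨v, t, rfl⟩
    obtain ⟨hrnot, hnd'⟩ := List.nodup_cons.mp hnd
    obtain ⟨hrs, hrv⟩ := hent (r, v) (by rw [List.zip_cons_cons]; exact List.mem_cons_self)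
    set s' := PySem.List.pySetD s (r : Int) 0 with hs'
    have hlen' : s'.length = s.length := pvSet_len s r 0
    have hIH : s'.Perm (vals' ++ List.replicate (s.length - rs'.length) 0) := by
      have h1 := ih vals' s' hnd' (by simpa using hlen) ?_ ?_
      · rwa [hlen'] at h1
      · intro p hp
        have hmem := List.of_mem_zip hp
        have hne : p.1 ≠ r := fun he => hrnot (he ▸ hmem.1)
        have := hent p (by rw [List.zip_cons_cons]; exact List.mem_cons_of_mem _ hp)
        rw [hlen']
        refine ⟨this.1, ?_⟩
        rw [hs', pvSet_entry s r hrs 0 p.1, if_neg hne]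
        exact this.2
      · intro j hj hjn
        rw [hlen'] at hj
        rw [hs', pvSet_entry s r hrs 0 j]
        by_cases hjr : j = r
        · rw [if_pos hjr]
        · rw [if_neg hjr]
          exact hz j hj (fun hm => hjn (by
            rcases List.mem_cons.mp hm with h | h
            · exact absurd h hjr
            · exact h))
    have hsplit : s = s.take r ++ s[r] :: s.drop (r + 1) := by
      conv_lhs => rw [← List.take_append_drop r s]
      rw [List.drop_eq_getElem_cons hrs]
    have hsetsplit : s' = s.take r ++ 0 :: s.drop (r + 1) := by
      rw [hs', PySem.List.pySetD_natCast, List.set_eq_take_append_cons_drop, if_pos hrs]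
    have hsv : s[r] = v := by
      rw [PySem.List.pyGetD_natCast, List.getD_eq_getElem _ _ hrs] at hrv
      exact hrv
    have hzipleft : ∀ z ∈ rs', ∃ w, (z, w) ∈ rs'.zip vals' := by
      intro z hz
      obtain ⟨i, hi, rfl⟩ := List.mem_iff_getElem.mp hz
      have hlen2 : rs'.length = vals'.length := by simpa using hlen
      refine ⟨vals'[i]'(by omega), ?_⟩
      rw [List.mem_iff_getElem]
      exact ⟨i, by simp [List.length_zip]; omega, by simp⟩
    have hbound : ∀ z ∈ r :: rs', z < s.length := by
      intro z hz
      rcases List.mem_cons.mp hz with h | h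
      · exact h ▸ hrs
      · obtain ⟨w, hw⟩ := hzipleft z h
        exact (hent (z, w) (by rw [List.zip_cons_cons]; exact List.mem_cons_of_mem _ hw)).1
    have hcard : (r :: rs').length ≤ s.length := by
      have h1 : (r :: rs').toFinset.card = (r :: rs').length := List.toFinset_card_of_nodup hnd
      have h2 : (r :: rs').toFinset ⊆ Finset.range s.length := by
        intro z hz2
        rw [List.mem_toFinset] at hz2
        rw [Finset.mem_range]
        exact hbound z hz2
      have h3 := Finset.card_le_card h2
      rw [h1, Finset.card_range] at h3
      exact h3
    have hm : s.length - rs'.length = (s.length - (rs'.length + 1)) + 1 := by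
      simp only [List.length_cons] at hcard
      omega
    have hsplit' : s = s.take r ++ v :: s.drop (r + 1) := by rw [← hsv]; exact hsplit
    have hperm1 : s.Perm (v :: (s.take r ++ s.drop (r + 1))) := by
      conv_lhs => rw [hsplit']
      exact List.perm_middle
    have hperm2 : s'.Perm ((0 : Int) :: (s.take r ++ s.drop (r + 1))) := by
      rw [hsetsplit]
      exact List.perm_middle
    have hperm3 : (vals' ++ List.replicate (s.length - rs'.length) (0 : Int)).Perm
        ((0 : Int) :: (vals' ++ List.replicate (s.length - (rs'.length + 1)) 0)) := by
      rw [hm, List.replicate_succ]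
      exact List.perm_middle
    have h4 := (hperm2.symm.trans (hIH.trans hperm3)).cons_inv
    have h6 : (v :: vals') ++ List.replicate (s.length - (r :: rs').length) (0 : Int) =
        v :: (vals' ++ List.replicate (s.length - (rs'.length + 1)) 0) := by
      simp [List.length_cons]
    rw [h6]
    exact hperm1.trans (h4.cons v)


-- ---------- the top-two scan ----------

def pvTop2Step (t : Int × Int) (v : Int) : Int × Int :=
  if v > t.1 then (v, t.1) else if v > t.2 then (t.1, v) else t

lemma pvTop2Step_rcomm (t : Int × Int) (a b : Int) :
    pvTop2Step (pvTop2Step t a) b = pvTop2Step (pvTop2Step t b) a := by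
  obtain ⟨t1, t2⟩ := t
  unfold pvTop2Step
  split_ifs <;> simp_all [Prod.mk.injEq] <;> omega

lemma pvTop2_perm {l₁ l₂ : List Int} (h : l₁.Perm l₂) :
    ∀ t, l₁.foldl pvTop2Step t = l₂.foldl pvTop2Step t := by
  induction h with
  | nil => intro t; rfl
  | cons x h ih => intro t; simp only [List.foldl_cons]; exact ih _
  | swap x y l => intro t; simp only [List.foldl_cons]; rw [pvTop2Step_rcomm]
  | trans h1 h2 ih1 ih2 => intro t; rw [ih1, ih2]

lemma pvTop2_state_nonneg : ∀ (l : List Int) (t : Int × Int), 0 ≤ t.1 → 0 ≤ t.2 →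
    0 ≤ (l.foldl pvTop2Step t).1 ∧ 0 ≤ (l.foldl pvTop2Step t).2 := by
  intro l
  induction l with
  | nil => intro t h1 h2; exact ⟨h1, h2⟩
  | cons v tl ih =>
    intro t h1 h2
    rw [List.foldl_cons]
    apply ih
    · unfold pvTop2Step; split_ifs <;> (try dsimp only) <;> omega
    · unfold pvTop2Step; split_ifs <;> (try dsimp only) <;> omega

lemma pvTop2_zeros : ∀ (m : Nat) (t : Int × Int), 0 ≤ t.1 → 0 ≤ t.2 →
    (List.replicate m (0 : Int)).foldl pvTop2Step t = t := by
  intro m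
  induction m with
  | zero => intro t _ _; rfl
  | succ m ih =>
    intro t h1 h2
    rw [List.replicate_succ, List.foldl_cons]
    have hstep : pvTop2Step t 0 = t := by
      unfold pvTop2Step; split_ifs <;> first | rfl | omega
    rw [hstep]
    exact ih t h1 h2

lemma pvTop2_small : ∀ (l : List Int) (t : Int × Int), t.2 ≤ t.1 → (∀ v ∈ l, v ≤ t.2) →
    l.foldl pvTop2Step t = t := by
  intro l
  induction l with
  | nil => intro t _ _; rfl
  | cons v tl ih =>
    intro t h1 h2
    rw [List.foldl_cons]
    have hv := h2 v List.mem_cons_self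
    have hstep : pvTop2Step t v = t := by
      unfold pvTop2Step; split_ifs <;> first | rfl | omega
    rw [hstep]
    exact ih t h1 (fun w hw => h2 w (List.mem_cons_of_mem _ hw))

lemma pvTop2_desc (sd : List Int) (hpw : sd.Pairwise (fun a b => b ≤ a))
    (hmem : ∀ v ∈ sd, 0 ≤ v) :
    (sd.foldl pvTop2Step (0, 0)).1 + (sd.foldl pvTop2Step (0, 0)).2 = (sd.take 2).sum := by
  match sd, hpw, hmem with
  | [], _, _ => rfl
  | [v], _, hmem =>
    have hv := hmem v List.mem_cons_self
    rw [List.foldl_cons, List.foldl_nil]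
    unfold pvTop2Step
    split_ifs <;> (try dsimp only) <;> simp [List.take, List.sum_cons] <;> omega
  | v1 :: v2 :: rest, hpw, hmem =>
    have h21 : v2 ≤ v1 := (List.pairwise_cons.mp hpw).1 v2 List.mem_cons_self
    have hrest2 : ∀ w ∈ rest, w ≤ v2 :=
      (List.pairwise_cons.mp (List.pairwise_cons.mp hpw).2).1
    have hv1 := hmem v1 List.mem_cons_self
    have hv2 := hmem v2 (List.mem_cons_of_mem _ List.mem_cons_self)
    rw [List.foldl_cons, List.foldl_cons]
    have hs2 : pvTop2Step (pvTop2Step (0, 0) v1) v2 = (v1, v2) := by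
      unfold pvTop2Step
      split_ifs <;> simp_all [Prod.mk.injEq] <;> omega
    rw [hs2, pvTop2_small rest (v1, v2) h21 hrest2]
    simp [List.take, List.sum_cons]

lemma pvTop2_sum_sorted (l : List Int) (hnn : ∀ v ∈ l, 0 ≤ v) :
    (l.foldl pvTop2Step (0, 0)).1 + (l.foldl pvTop2Step (0, 0)).2 =
      ((PySem.List.sorted l (fun v => v) true).take 2).sum := by
  have hperm : l.Perm (PySem.List.sorted l (fun v => v) true) :=
    (PySem.List.sorted_perm l (fun v => v) true).symm
  rw [pvTop2_perm hperm]
  exact pvTop2_desc _ (PySem.List.sorted_pairwise_rev l (fun v => v))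
    (fun v hv => hnn v (hperm.mem_iff.mpr hv))

-- ---------- B's fold is aligned with the spec partition ----------

def pvAlign (c : PySem.Set Int × PySem.Set Int × Int) (g : List (Int × Int)) : Prop :=
  c.2.2 = (g.length : Int) ∧ (∀ u : Int, u ∈ c.1 ↔ ∃ q ∈ g, q.1 = u) ∧
    (∀ u : Int, u ∈ c.2.1 ↔ ∃ q ∈ g, q.2 = u)

lemma pvContains_iff (s : PySem.Set Int) (u : Int) : PySem.Set.contains s u = true ↔ u ∈ s := by
  simp [PySem.Set.contains]


lemma pvForall2_append {α β : Type} {R : α → β → Prop} :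
    ∀ {l1 : List α} {l2 : List β} {u1 : List α} {u2 : List β},
    List.Forall₂ R l1 l2 → List.Forall₂ R u1 u2 → List.Forall₂ R (l1 ++ u1) (l2 ++ u2) := by
  intro l1 l2 u1 u2 h1 h2
  induction h1 with
  | nil => exact h2
  | cons hr _ ih => exact List.forall₂_cons.mpr ⟨hr, ih⟩

lemma pvStepB_inner : ∀ (cs : List (PySem.Set Int × PySem.Set Int × Int))
    (gs : List (List (Int × Int))), List.Forall₂ pvAlign cs gs → ∀ (x y : Int)
    (xs ys : PySem.Set Int) (sz : Int) (rest : List (PySem.Set Int × PySem.Set Int × Int))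
    (grest gacc : List (List (Int × Int))),
    List.Forall₂ pvAlign rest grest →
    (∀ u, u ∈ xs ↔ u = x ∨ ∃ g ∈ gacc, ∃ q ∈ g, q.1 = u) →
    (∀ u, u ∈ ys ↔ u = y ∨ ∃ g ∈ gacc, ∃ q ∈ g, q.2 = u) →
    sz = 1 + ((gacc.map List.length).sum : Int) →
    List.Forall₂ pvAlign (cs.foldl (fun st c =>
        if PySem.Set.contains c.1 x || PySem.Set.contains c.2.1 y then
          (PySem.Set.union st.1 c.1, PySem.Set.union st.2.1 c.2.1, st.2.2.1 + c.2.2, st.2.2.2)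
        else (st.1, st.2.1, st.2.2.1, st.2.2.2 ++ [c])) (xs, ys, sz, rest)).2.2.2
      (grest ++ gs.filter (fun g => !pvTouch (x, y) g)) ∧
    (∀ u, u ∈ (cs.foldl (fun st c =>
        if PySem.Set.contains c.1 x || PySem.Set.contains c.2.1 y then
          (PySem.Set.union st.1 c.1, PySem.Set.union st.2.1 c.2.1, st.2.2.1 + c.2.2, st.2.2.2)
        else (st.1, st.2.1, st.2.2.1, st.2.2.2 ++ [c])) (xs, ys, sz, rest)).1 ↔
      u = x ∨ ∃ g ∈ gacc ++ gs.filter (pvTouch (x, y)), ∃ q ∈ g, q.1 = u) ∧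
    (∀ u, u ∈ (cs.foldl (fun st c =>
        if PySem.Set.contains c.1 x || PySem.Set.contains c.2.1 y then
          (PySem.Set.union st.1 c.1, PySem.Set.union st.2.1 c.2.1, st.2.2.1 + c.2.2, st.2.2.2)
        else (st.1, st.2.1, st.2.2.1, st.2.2.2 ++ [c])) (xs, ys, sz, rest)).2.1 ↔
      u = y ∨ ∃ g ∈ gacc ++ gs.filter (pvTouch (x, y)), ∃ q ∈ g, q.2 = u) ∧
    (cs.foldl (fun st c =>
        if PySem.Set.contains c.1 x || PySem.Set.contains c.2.1 y then
          (PySem.Set.union st.1 c.1, PySem.Set.union st.2.1 c.2.1, st.2.2.1 + c.2.2, st.2.2.2)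
        else (st.1, st.2.1, st.2.2.1, st.2.2.2 ++ [c])) (xs, ys, sz, rest)).2.2.1 =
      1 + (((gacc ++ gs.filter (pvTouch (x, y))).map List.length).sum : Int) := by
  intro cs gs h
  induction h with
  | nil =>
    intro x y xs ys sz rest grest gacc hrest hxs hys hsz
    simp only [List.foldl_nil, List.filter_nil, List.append_nil]
    exact ⟨hrest, hxs, hys, hsz⟩
  | @cons c g cs' gs' hcg htl ih =>
    intro x y xs ys sz rest grest gacc hrest hxs hys hsz
    obtain ⟨hsz1, hmx, hmy⟩ := hcg
    have hteq : (PySem.Set.contains c.1 x || PySem.Set.contains c.2.1 y) = pvTouch (x, y) g := by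
      rcases hb : pvTouch (x, y) g with _ | _
      · rw [pvTouch_false] at hb
        rw [Bool.or_eq_false_iff]
        constructor
        · rw [Bool.eq_false_iff]
          intro hc
          obtain ⟨q, hq, hq1⟩ := (hmx x).mp ((pvContains_iff _ _).mp hc)
          exact (hb q hq).1 hq1
        · rw [Bool.eq_false_iff]
          intro hc
          obtain ⟨q, hq, hq2⟩ := (hmy y).mp ((pvContains_iff _ _).mp hc)
          exact (hb q hq).2 hq2
      · obtain ⟨q, hq, hq12⟩ := (pvTouch_iff _ _).mp hb
        rw [Bool.or_eq_true]
        rcases hq12 with h1 | h1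
        · exact Or.inl ((pvContains_iff _ _).mpr ((hmx x).mpr ⟨q, hq, h1⟩))
        · exact Or.inr ((pvContains_iff _ _).mpr ((hmy y).mpr ⟨q, hq, h1⟩))
    rw [List.foldl_cons]
    rcases hb : pvTouch (x, y) g with _ | _
    · rw [hteq, hb]
      simp only [Bool.false_eq_true, if_false]
      have hres := ih x y xs ys sz (rest ++ [c]) (grest ++ [g]) gacc
        (pvForall2_append hrest (List.forall₂_cons.mpr ⟨⟨hsz1, hmx, hmy⟩, List.Forall₂.nil⟩))
        hxs hys hsz
      rw [List.filter_cons_of_pos (p := fun g => !pvTouch (x, y) g) (by simp [hb]),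
        List.filter_cons_of_neg (p := pvTouch (x, y)) (by simp [hb])]
      rw [List.append_assoc, List.singleton_append] at hres
      exact hres
    · rw [hteq, hb]
      simp only [if_true]
      have hres := ih x y (PySem.Set.union xs c.1) (PySem.Set.union ys c.2.1) (sz + c.2.2)
        rest grest (gacc ++ [g]) hrest ?_ ?_ ?_
      · rw [List.filter_cons_of_neg (p := fun g => !pvTouch (x, y) g) (by simp [hb]),
          List.filter_cons_of_pos (p := pvTouch (x, y)) (by simp [hb])]
        rw [List.append_assoc, List.singleton_append] at hres
        exact hres
      · intro u
        rw [PySem.Set.mem_union, hxs u, hmx u]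
        constructor
        · rintro ((h | ⟨g2, hg2, hq⟩) | hq)
          · exact Or.inl h
          · exact Or.inr ⟨g2, List.mem_append_left _ hg2, hq⟩
          · exact Or.inr ⟨g, List.mem_append_right _ (List.mem_singleton.mpr rfl), hq⟩
        · rintro (h | ⟨g2, hg2, hq⟩)
          · exact Or.inl (Or.inl h)
          · rcases List.mem_append.mp hg2 with h2 | h2
            · exact Or.inl (Or.inr ⟨g2, h2, hq⟩)
            · rw [List.mem_singleton] at h2
              exact Or.inr (h2 ▸ hq)
      · intro u
        rw [PySem.Set.mem_union, hys u, hmy u]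
        constructor
        · rintro ((h | ⟨g2, hg2, hq⟩) | hq)
          · exact Or.inl h
          · exact Or.inr ⟨g2, List.mem_append_left _ hg2, hq⟩
          · exact Or.inr ⟨g, List.mem_append_right _ (List.mem_singleton.mpr rfl), hq⟩
        · rintro (h | ⟨g2, hg2, hq⟩)
          · exact Or.inl (Or.inl h)
          · rcases List.mem_append.mp hg2 with h2 | h2
            · exact Or.inl (Or.inr ⟨g2, h2, hq⟩)
            · rw [List.mem_singleton] at h2
              exact Or.inr (h2 ▸ hq)
      · rw [hsz, hsz1]
        simp only [List.map_append, List.map_cons, List.map_nil, List.sum_append,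
          List.sum_cons, List.sum_nil]
        push_cast
        ring

lemma pvStepB_align (comps : List (PySem.Set Int × PySem.Set Int × Int))
    (gs : List (List (Int × Int))) (h : List.Forall₂ pvAlign comps gs)
    (p : List Int) (hp : p.length = 2) :
    List.Forall₂ pvAlign (pvStepB comps p) (pvGStep gs (pvPair p)) := by
  obtain ⟨a, b, rfl⟩ := pvLen2 p hp
  show List.Forall₂ pvAlign (pvStepB comps [a, b]) (pvGStep gs (a, b))
  have hinner := pvStepB_inner comps gs h a b
    (PySem.Set.ofList [a]) (PySem.Set.ofList [b]) 1 [] [] []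
    List.Forall₂.nil
    (by intro u; rw [PySem.Set.mem_ofList]; simp)
    (by intro u; rw [PySem.Set.mem_ofList]; simp)
    (by simp)
  obtain ⟨hrest, hxs, hys, hsz⟩ := hinner
  rw [List.nil_append] at hrest
  simp only [List.nil_append] at hxs hys hsz
  show List.Forall₂ pvAlign (_ ++ [_]) _
  unfold pvGStep
  apply pvForall2_append hrest
  apply List.forall₂_cons.mpr
  refine ⟨⟨?_, ?_, ?_⟩, List.Forall₂.nil⟩
  · rw [hsz]
    simp only [List.length_cons, List.length_flatten]
    push_cast
    ring
  · intro u
    rw [hxs u]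
    simp only [List.mem_cons, List.mem_flatten]
    constructor
    · rintro (h1 | ⟨g, hg, q, hq, hq1⟩)
      · exact ⟨(a, b), Or.inl rfl, h1.symm⟩
      · exact ⟨q, Or.inr ⟨g, hg, hq⟩, hq1⟩
    · rintro ⟨q, (h1 | ⟨g, hg, hq⟩), hq1⟩
      · exact Or.inl (by rw [← hq1, h1])
      · exact Or.inr ⟨g, hg, q, hq, hq1⟩
  · intro u
    rw [hys u]
    simp only [List.mem_cons, List.mem_flatten]
    constructor
    · rintro (h1 | ⟨g, hg, q, hq, hq2⟩)
      · exact ⟨(a, b), Or.inl rfl, h1.symm⟩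
      · exact ⟨q, Or.inr ⟨g, hg, hq⟩, hq2⟩
    · rintro ⟨q, (h1 | ⟨g, hg, hq⟩), hq2⟩
      · exact Or.inl (by rw [← hq2, h1])
      · exact Or.inr ⟨g, hg, q, hq, hq2⟩

lemma pvLoopB : ∀ (l : List (List Int)) (comps : List (PySem.Set Int × PySem.Set Int × Int))
    (gs : List (List (Int × Int))), List.Forall₂ pvAlign comps gs → (∀ p ∈ l, p.length = 2) →
    List.Forall₂ pvAlign (l.foldl pvStepB comps) ((l.map pvPair).foldl pvGStep gs) := by
  intro l
  induction l with
  | nil => intro comps gs h _; exact h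
  | cons p t ih =>
    intro comps gs h hp
    rw [List.foldl_cons, List.map_cons, List.foldl_cons]
    exact ih _ _ (pvStepB_align comps gs h p (hp p List.mem_cons_self))
      (fun q hq => hp q (List.mem_cons_of_mem _ hq))

lemma pvAlign_sizes : ∀ (comps : List (PySem.Set Int × PySem.Set Int × Int))
    (gs : List (List (Int × Int))), List.Forall₂ pvAlign comps gs →
    comps.map (fun c => c.2.2) = gs.map (fun g => (g.length : Int)) := by
  intro comps gs h
  induction h with
  | nil => rfl
  | cons hcg _ ih =>
    simp only [List.map_cons]
    rw [hcg.1, ih]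

-- ---------- the closed-form change region equals A's redundant-union flag ----------

lemma pvBadFold_fst : ∀ (l : List (Int × Int)) (gs : List (List (Int × Int))) (b : Bool),
    (l.foldl (fun st p => (pvGStep st.1 p, st.2 || pvBadStep st.1 p)) (gs, b)).1 =
      l.foldl pvGStep gs := by
  intro l
  induction l with
  | nil => intro gs b; rfl
  | cons p t ih => intro gs b; exact ih _ _

lemma pvCntFold_fst : ∀ (l : List (Int × Int)) (gs : List (List (Int × Int))) (b : Nat),
    (l.foldl (fun st p => (pvGStep st.1 p, st.2 + (if pvBadStep st.1 p then 1 else 0))) (gs, b)).1 =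
      l.foldl pvGStep gs := by
  intro l
  induction l with
  | nil => intro gs b; rfl
  | cons p t ih => intro gs b; exact ih _ _

lemma pvBad_append (ps : List (Int × Int)) (p : Int × Int) :
    pvBad (ps ++ [p]) = (pvBad ps || pvBadStep (pvGroups ps) p) := by
  unfold pvBad
  rw [List.foldl_append, List.foldl_cons, List.foldl_nil]
  rw [pvGroups, ← pvBadFold_fst ps [] false]

lemma pvCnt_append (ps : List (Int × Int)) (p : Int × Int) :
    pvCnt (ps ++ [p]) = pvCnt ps + (if pvBadStep (pvGroups ps) p then 1 else 0) := by
  unfold pvCnt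
  rw [List.foldl_append, List.foldl_cons, List.foldl_nil]
  rw [pvGroups, ← pvCntFold_fst ps [] 0]

lemma pvBad_iff_cnt (ps : List (Int × Int)) : pvBad ps = true ↔ pvCnt ps ≠ 0 := by
  induction ps using List.reverseRecOn with
  | nil => simp [pvBad, pvCnt]
  | append_singleton ps p ih =>
    rw [pvBad_append, pvCnt_append]
    rcases h : pvBadStep (pvGroups ps) p with _ | _
    · simpa using ih
    · simp

lemma pvGroups_flat : ∀ (ps : List (Int × Int)) (q : Int × Int),
    (∃ g ∈ pvGroups ps, q ∈ g) ↔ q ∈ ps := by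
  intro ps
  induction ps using List.reverseRecOn with
  | nil => intro q; simp [pvGroups]
  | append_singleton ps p ih =>
    intro q
    rw [pvGroups_concat]
    unfold pvGStep
    constructor
    · rintro ⟨g, hg, hq⟩
      rcases List.mem_append.mp hg with h | h
      · exact List.mem_append_left _ ((ih q).mp ⟨g, (List.mem_filter.mp h).1, hq⟩)
      · rw [List.mem_singleton] at h
        subst h
        rcases List.mem_cons.mp hq with h | h
        · subst h; exact List.mem_append_right _ (List.mem_singleton.mpr rfl)
        · rw [List.mem_flatten] at h
          obtain ⟨g2, hg2, hq2⟩ := h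
          exact List.mem_append_left _ ((ih q).mp ⟨g2, (List.mem_filter.mp hg2).1, hq2⟩)
    · intro hmem
      rcases List.mem_append.mp hmem with h | h
      · obtain ⟨g, hg, hq⟩ := (ih q).mpr h
        by_cases ht : pvTouch p g = true
        · refine ⟨p :: (List.filter (pvTouch p) (pvGroups ps)).flatten,
            List.mem_append_right _ (List.mem_singleton.mpr rfl), ?_⟩
          exact List.mem_cons_of_mem _
            (List.mem_flatten.mpr ⟨g, List.mem_filter.mpr ⟨hg, ht⟩, hq⟩)
        · exact ⟨g, List.mem_append_left _
            (List.mem_filter.mpr ⟨hg, by simp [Bool.eq_false_iff.mpr ht]⟩), hq⟩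
      · rw [List.mem_singleton] at h
        subst h
        exact ⟨_, List.mem_append_right _ (List.mem_singleton.mpr rfl), List.mem_cons_self⟩

lemma pvGroups_ne_nil : ∀ (ps : List (Int × Int)), ∀ g ∈ pvGroups ps, g ≠ [] := by
  intro ps
  induction ps using List.reverseRecOn with
  | nil => intro g hg; simp [pvGroups] at hg
  | append_singleton ps p ih =>
    intro g hg
    rw [pvGroups_concat] at hg
    unfold pvGStep at hg
    rcases List.mem_append.mp hg with h | h
    · exact ih g (List.mem_filter.mp h).1
    · rw [List.mem_singleton] at h; subst h; simp

lemma pvGroups_nodup (ps : List (Int × Int)) : (pvGroups ps).Nodup := by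
  have hpw := pvGroups_pairwise ps
  have hne := pvGroups_ne_nil ps
  refine List.Pairwise.imp_of_mem ?_ hpw
  intro g h hg hh hd he
  subst he
  obtain ⟨q, hq⟩ := List.exists_mem_of_ne_nil g (hne g hg)
  exact (hd q hq q hq).1 rfl

lemma pvFilterSplit {α : Type} (l : List α) (f : α → Bool) :
    (l.filter f).length + (l.filter (fun a => !f a)).length = l.length := by
  induction l with
  | nil => rfl
  | cons a t ih => cases h : f a <;> simp [List.filter_cons, h, ← ih] <;> omega

lemma pvCardSnoc (l : List Int) (a : Int) :
    (l ++ [a]).toFinset.card =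
      l.toFinset.card + (if a ∈ l then 0 else 1) := by
  rw [List.toFinset_append]
  have h1 : (([a] : List Int).toFinset : Finset Int) = {a} := by simp
  rw [h1, Finset.union_singleton]
  by_cases h : a ∈ l
  · rw [if_pos h, Finset.insert_eq_self.mpr (List.mem_toFinset.mpr h)]
    omega
  · rw [if_neg h, Finset.card_insert_of_notMem (fun hc => h (List.mem_toFinset.mp hc))]

lemma pvCount : ∀ (ps : List (Int × Int)),
    ps.length + (pvGroups ps).length =
      (ps.map Prod.fst).toFinset.card + (ps.map Prod.snd).toFinset.card + pvCnt ps := by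
  intro ps
  induction ps using List.reverseRecOn with
  | nil => rfl
  | append_singleton ps p ih =>
    have hflat := pvGroups_flat ps
    have hnd := pvGroups_nodup ps
    have hpw := pvGroups_pairwise ps
    set gs := pvGroups ps with hgs
    -- the new group list and its length
    have hGnew : pvGroups (ps ++ [p]) =
        (gs.filter fun g => !pvTouch p g) ++ [p :: (gs.filter (pvTouch p)).flatten] := by
      rw [pvGroups_concat]; rfl
    have hsplit := pvFilterSplit gs (pvTouch p)
    have hlenC : (pvGroups (ps ++ [p])).length =
        gs.length - (gs.filter (pvTouch p)).length + 1 := by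
      rw [hGnew, List.length_append]
      simp only [List.length_cons, List.length_nil]
      omega
    -- coordinate-count deltas
    have hxcard := pvCardSnoc (ps.map Prod.fst) p.1
    have hycard := pvCardSnoc (ps.map Prod.snd) p.2
    have hxmap : ((ps ++ [p]).map Prod.fst) = ps.map Prod.fst ++ [p.1] := by simp
    have hymap : ((ps ++ [p]).map Prod.snd) = ps.map Prod.snd ++ [p.2] := by simp
    -- earlier matches through groups
    have hXM : p.1 ∈ ps.map Prod.fst ↔ ∃ g ∈ gs, ∃ q ∈ g, q.1 = p.1 := by
      constructor
      · intro h
        obtain ⟨q, hq, hq1⟩ := List.mem_map.mp h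
        obtain ⟨g, hg, hqg⟩ := (hflat q).mpr hq
        exact ⟨g, hg, q, hqg, hq1⟩
      · rintro ⟨g, hg, q, hq, hq1⟩
        exact List.mem_map.mpr ⟨q, (hflat q).mp ⟨g, hg, hq⟩, hq1⟩
    have hYM : p.2 ∈ ps.map Prod.snd ↔ ∃ g ∈ gs, ∃ q ∈ g, q.2 = p.2 := by
      constructor
      · intro h
        obtain ⟨q, hq, hq2⟩ := List.mem_map.mp h
        obtain ⟨g, hg, hqg⟩ := (hflat q).mpr hq
        exact ⟨g, hg, q, hqg, hq2⟩
      · rintro ⟨g, hg, q, hq, hq2⟩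
        exact List.mem_map.mpr ⟨q, (hflat q).mp ⟨g, hg, hq⟩, hq2⟩
    -- at most one group carries each coordinate
    have hUx : ∀ g ∈ gs, ∀ h ∈ gs, (∃ q ∈ g, q.1 = p.1) → (∃ r ∈ h, r.1 = p.1) → g = h := by
      intro g hg h hh ⟨q, hq, hq1⟩ ⟨r, hr, hr1⟩
      by_cases he : g = h
      · exact he
      · exact absurd (hq1.trans hr1.symm)
          ((List.Pairwise.forall pvDisj_symm hpw hg hh he q hq r hr).1)
    have hUy : ∀ g ∈ gs, ∀ h ∈ gs, (∃ q ∈ g, q.2 = p.2) → (∃ r ∈ h, r.2 = p.2) → g = h := by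
      intro g hg h hh ⟨q, hq, hq2⟩ ⟨r, hr, hr2⟩
      by_cases he : g = h
      · exact he
      · exact absurd (hq2.trans hr2.symm)
          ((List.Pairwise.forall pvDisj_symm hpw hg hh he q hq r hr).2)
    have hbs : pvBadStep gs p = true ↔
        ∃ g ∈ gs, (∃ q ∈ g, q.1 = p.1) ∧ (∃ q ∈ g, q.2 = p.2) := by
      unfold pvBadStep
      simp
    have hcnt := pvCnt_append ps p
    rw [List.length_append, hlenC, hxmap, hymap, hxcard, hycard, hcnt, ← hgs]
    simp only [List.length_cons, List.length_nil]
    by_cases hA : p.1 ∈ ps.map Prod.fst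
    · obtain ⟨gx, hgx, wx⟩ := hXM.mp hA
      by_cases hB : p.2 ∈ ps.map Prod.snd
      · obtain ⟨gy, hgy, wy⟩ := hYM.mp hB
        by_cases hxy : gx = gy
        · -- both matches in the same component: the redundant union
          subst hxy
          have hT : gs.filter (pvTouch p) = [gx] := by
            apply pvSingletonOf _ (hnd.filter _) gx
              (List.mem_filter.mpr ⟨hgx, (pvTouch_iff p gx).mpr
                (by obtain ⟨q, hq, hq1⟩ := wx; exact ⟨q, hq, Or.inl hq1⟩)⟩)
            intro z hz
            rw [List.mem_filter] at hz
            obtain ⟨q, hq, hq12⟩ := (pvTouch_iff p z).mp hz.2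
            rcases hq12 with h | h
            · exact hUx z hz.1 gx hgx ⟨q, hq, h⟩ wx
            · exact hUy z hz.1 gx hgy ⟨q, hq, h⟩ wy
          have hbst : pvBadStep gs p = true := hbs.mpr ⟨gx, hgx, wx, wy⟩
          have hlb : 1 ≤ gs.length := by
            cases hgse : gs with
            | nil => rw [hgse] at hgx; simp at hgx
            | cons _ _ => simp [hgse]
          rw [hT, if_pos hA, if_pos hB, if_pos hbst]
          simp only [List.length_cons, List.length_nil]
          omega
        · -- two different components merge
          have hperm : (gs.filter (pvTouch p)).Perm [gx, gy] := by
            apply pvPairOf _ (hnd.filter _) gx gy hxy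
              (List.mem_filter.mpr ⟨hgx, (pvTouch_iff p gx).mpr
                (by obtain ⟨q, hq, hq1⟩ := wx; exact ⟨q, hq, Or.inl hq1⟩)⟩)
              (List.mem_filter.mpr ⟨hgy, (pvTouch_iff p gy).mpr
                (by obtain ⟨q, hq, hq2⟩ := wy; exact ⟨q, hq, Or.inr hq2⟩)⟩)
            intro z hz
            rw [List.mem_filter] at hz
            obtain ⟨q, hq, hq12⟩ := (pvTouch_iff p z).mp hz.2
            rcases hq12 with h | h
            · exact Or.inl (hUx z hz.1 gx hgx ⟨q, hq, h⟩ wx)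
            · exact Or.inr (hUy z hz.1 gy hgy ⟨q, hq, h⟩ wy)
          have hT2 : (gs.filter (pvTouch p)).length = 2 := by rw [hperm.length_eq]; rfl
          have hbst : pvBadStep gs p = false := by
            rw [Bool.eq_false_iff]
            intro hc
            obtain ⟨g, hg, wgx, wgy⟩ := hbs.mp hc
            exact hxy ((hUx gx hgx g hg wx wgx).trans (hUy g hg gy hgy wgy wy))
          have hle : (gs.filter (pvTouch p)).length ≤ gs.length := List.length_filter_le _ _
          rw [hT2, if_pos hA, if_pos hB, if_neg (by rw [hbst]; simp)]
          omega
      · -- only an x-match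
        have hT : gs.filter (pvTouch p) = [gx] := by
          apply pvSingletonOf _ (hnd.filter _) gx
            (List.mem_filter.mpr ⟨hgx, (pvTouch_iff p gx).mpr
              (by obtain ⟨q, hq, hq1⟩ := wx; exact ⟨q, hq, Or.inl hq1⟩)⟩)
          intro z hz
          rw [List.mem_filter] at hz
          obtain ⟨q, hq, hq12⟩ := (pvTouch_iff p z).mp hz.2
          rcases hq12 with h | h
          · exact hUx z hz.1 gx hgx ⟨q, hq, h⟩ wx
          · exact absurd (hYM.mpr ⟨z, hz.1, q, hq, h⟩) hB
        have hbst : pvBadStep gs p = false := by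
          rw [Bool.eq_false_iff]
          intro hc
          obtain ⟨g, hg, wgx, wgy⟩ := hbs.mp hc
          exact hB (hYM.mpr ⟨g, hg, wgy⟩)
        have hlb : 1 ≤ gs.length := by
          cases hgse : gs with
          | nil => rw [hgse] at hgx; simp at hgx
          | cons _ _ => simp [hgse]
        rw [hT, if_pos hA, if_neg hB, if_neg (by rw [hbst]; simp)]
        simp only [List.length_cons, List.length_nil]
        omega
    · by_cases hB : p.2 ∈ ps.map Prod.snd
      · -- only a y-match
        obtain ⟨gy, hgy, wy⟩ := hYM.mp hB
        have hT : gs.filter (pvTouch p) = [gy] := by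
          apply pvSingletonOf _ (hnd.filter _) gy
            (List.mem_filter.mpr ⟨hgy, (pvTouch_iff p gy).mpr
              (by obtain ⟨q, hq, hq2⟩ := wy; exact ⟨q, hq, Or.inr hq2⟩)⟩)
          intro z hz
          rw [List.mem_filter] at hz
          obtain ⟨q, hq, hq12⟩ := (pvTouch_iff p z).mp hz.2
          rcases hq12 with h | h
          · exact absurd (hXM.mpr ⟨z, hz.1, q, hq, h⟩) hA
          · exact hUy z hz.1 gy hgy ⟨q, hq, h⟩ wy
        have hbst : pvBadStep gs p = false := by
          rw [Bool.eq_false_iff]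
          intro hc
          obtain ⟨g, hg, wgx, wgy⟩ := hbs.mp hc
          exact hA (hXM.mpr ⟨g, hg, wgx⟩)
        have hlb : 1 ≤ gs.length := by
          cases hgse : gs with
          | nil => rw [hgse] at hgy; simp at hgy
          | cons _ _ => simp [hgse]
        rw [hT, if_neg hA, if_pos hB, if_neg (by rw [hbst]; simp)]
        simp only [List.length_cons, List.length_nil]
        omega
      · -- a fresh, isolated point
        have hT : gs.filter (pvTouch p) = [] := by
          rw [List.filter_eq_nil_iff]
          intro g hg hc
          obtain ⟨q, hq, hq12⟩ := (pvTouch_iff p g).mp hc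
          rcases hq12 with h | h
          · exact hA (hXM.mpr ⟨g, hg, q, hq, h⟩)
          · exact hB (hYM.mpr ⟨g, hg, q, hq, h⟩)
        have hbst : pvBadStep gs p = false := by
          rw [Bool.eq_false_iff]
          intro hc
          obtain ⟨g, hg, wgx, wgy⟩ := hbs.mp hc
          exact hA (hXM.mpr ⟨g, hg, wgx⟩)
        rw [hT, if_neg hA, if_neg hB, if_neg (by rw [hbst]; simp)]
        simp only [List.length_nil]
        omega

lemma pvBad_iff (ps : List (Int × Int)) :
    pvBad ps = true ↔
      (ps.map Prod.fst).toFinset.card + (ps.map Prod.snd).toFinset.card <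
        ps.length + (pvGroups ps).length := by
  have hc := pvCount ps
  rw [pvBad_iff_cnt]
  omega

lemma pvD_iff (points : List (List Int)) :
    D_maxActivated points ↔
      pvBad (points.map fun p => (p.getD 0 0, p.getD 1 0)) = true := by
  rw [pvBad_iff]
  exact Iff.rfl

-- ===== VERDICT (by name: the statement is the Claim_ definition above) =====
theorem maxActivated_spec : Claim_unchanged_maxActivated := by
  intro points _ hpre hnd
  have hlen2 : ∀ p ∈ points, p.length = 2 := by
    intro p hp
    unfold Pre_maxActivated at hpre
    rw [List.all_eq_true] at hpre
    simpa using hpre p hp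
  have hmap : points.map (fun p => (p.getD 0 0, p.getD 1 0)) = points.map pvPair := by
    apply List.map_congr_left
    intro p hp
    obtain ⟨a, b, rfl⟩ := pvLen2 p (hlen2 p hp)
    rfl
  have hbadfalse : pvBad (points.map pvPair) = false := by
    have h1 : ¬ pvBad (points.map fun p => (p.getD 0 0, p.getD 1 0)) = true :=
      fun hc => hnd ((pvD_iff points).mpr hc)
    rw [hmap] at h1
    exact Bool.eq_false_iff.mpr h1
  set n := points.length with hn
  obtain ⟨L, hfin⟩ := pvLoopA points [] (PySem.List.pyRange 0 (n : Int) 1)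
    (List.replicate n (1 : Int)) PySem.Dict.empty PySem.Dict.empty [] n (pvInit n)
    (by simp [hn]) hlen2 hbadfalse
  rw [List.nil_append] at hfin
  simp only [List.length_nil, Nat.cast_zero] at hfin
  set st := (PySem.List.enumerate points 0).foldl pvStepA
    (PySem.List.pyRange 0 (n : Int) 1, List.replicate n (1 : Int),
      PySem.Dict.empty, PySem.Dict.empty) with hst
  obtain ⟨ufLen, szLen, kLe, tailUf, tailSz, mono, closed, grpEq, keyNodup, entries,
    rootsIn, nonRoot, rxSome, rxVal, rySome, ryVal⟩ := hfin
  set vals := L.map (fun e => (e.2.length : Int)) with hvals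
  have hpslen : (points.map pvPair).length = n := by simp [hn]
  have hA : maxActivated points =
      ((PySem.List.pyRange 0 (n : Int) 1).foldl
        (fun t i => pvTop2Step t (PySem.List.pyGetD st.2.1 i 0)) (0, 0)).1 +
      ((PySem.List.pyRange 0 (n : Int) 1).foldl
        (fun t i => pvTop2Step t (PySem.List.pyGetD st.2.1 i 0)) (0, 0)).2 + 1 := rfl
  have hlen : (n : Int) = (st.2.1.length : Int) := by rw [szLen]
  rw [hlen] at hA
  rw [PySem.List.foldl_pyRange_zero_pyGetD' st.2.1 0 pvTop2Step (0, 0)] at hA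
  have hperm : st.2.1.Perm (vals ++ List.replicate (st.2.1.length - L.length) 0) := by
    have h1 := pvPermOfRoots (L.map Prod.fst) vals st.2.1 keyNodup (by simp [hvals]) ?_ ?_
    · simpa using h1
    · intro p hp
      rw [hvals, List.zip_map'] at hp
      obtain ⟨e, he, rfl⟩ := List.mem_map.mp hp
      have h1 := (entries e he).1
      refine ⟨by rw [szLen]; omega, (entries e he).2.2.1⟩
    · intro j hj hjn
      apply nonRoot j (by rw [szLen] at hj; omega)
      intro e he hej
      exact hjn (List.mem_map.mpr ⟨e, he, hej⟩)
  have hnnvals : ∀ v ∈ vals, 0 ≤ v := by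
    intro v hv
    rw [hvals] at hv
    obtain ⟨e, _, rfl⟩ := List.mem_map.mp hv
    exact Int.natCast_nonneg _
  have hfoldeq : st.2.1.foldl pvTop2Step (0, 0) = vals.foldl pvTop2Step (0, 0) := by
    rw [pvTop2_perm hperm (0, 0), List.foldl_append]
    have hnn := pvTop2_state_nonneg vals (0, 0) le_rfl le_rfl
    exact pvTop2_zeros _ _ hnn.1 hnn.2
  have halign := pvLoopB points [] [] List.Forall₂.nil hlen2
  have hsB : (points.foldl pvStepB []).map (fun c => c.2.2) = vals := by
    rw [pvAlign_sizes _ _ halign]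
    show (pvGroups (points.map pvPair)).map _ = _
    rw [grpEq, List.map_map, hvals]
    rfl
  have hB : maxActivated_alt points =
      ((PySem.List.sorted vals (fun v => v) true).take 2).sum + 1 := by
    show (PySem.List.slice (PySem.List.sorted
      ((points.foldl pvStepB []).map (fun c => c.2.2)) (fun v => v) true) none (some 2)).sum + 1 = _
    rw [hsB, PySem.List.slice_to _ (by norm_num)]
    rfl
  show maxActivated points = maxActivated_alt points
  rw [hA, hfoldeq, hB, pvTop2_sum_sorted vals hnnvals]

theorem maxActivated_changed : Claim_changed_maxActivated := by
  unfold Claim_changed_maxActivated; decide
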